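-- pv_equiv track=rewrite | github.com/dodoyeon/SW_Academy | swtest_blog/bj_16234.py | search
-- ===== SOURCE A (Python) =====
-- from collections import deque
--
-- dx = [1,0,-1,0]
--
-- dy = [0,1,0,-1]
--
-- def bfs(a,visited,mapp,n,l,r,x,y):
--     q = deque()
--     q.append([x,y])
--     visited[y][x] = True
--     # mapp[y][x] = True
--     index = [(x,y)]
--     sum = a[y][x]
--     num = 1
--     stop = 0
--
--     while q:
--         x,y = q.popleft()
--         for i in range(4):
--             nx = x + dx[i]
--             ny = y + dy[i]
--             if 0<=nx<n and 0<=ny<n and not visited[ny][nx]: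
--                 if l<=abs(a[ny][nx]-a[y][x])<=r:
--                     sum += a[ny][nx]
--                     num += 1
--                     stop += 1
--                     q.append([nx,ny])
--                     visited[ny][nx] = True
--                     # mapp[ny][nx] = True
--                     index.append((nx,ny))
--     value = (sum//num)
--     for x,y in index:
--         mapp[y][x] = value
--
--     return value, stop
--
-- def search(a,n,l,r):
--     visited = [[False] * n for _ in range(n)]
--     mapp = [[0]*n for _ in range(n)]
--     stop2 = 0
--
--     for j in range(n):
--         for i in range(n):
--             if not visited[j][i]:
--                 value, stop = bfs(a,visited,mapp,n,l,r,i,j)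
--                 # for c in range(n):
--                 #     for d in range(n):
--                 #         if mapp[d][c]:
--                 #             mapp[d][c] = value
--                 stop2 += stop
--     return mapp, stop2
-- ===== SOURCE B (Python) =====
-- def search(a, n, l, r):
--     # Edge-contraction labelling: start with one label per cell, merge labels
--     # across every qualifying right/down edge, then aggregate per label.
--     size = max(n, 0)
--     lab = list(range(size * size))
--     for j in range(n):
--         for i in range(n):
--             for nx, ny in ((i + 1, j), (i, j + 1)):
--                 if nx < n and ny < n and l <= abs(a[ny][nx] - a[j][i]) <= r:
--                     la, lb = lab[j * n + i], lab[ny * n + nx]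
--                     if la != lb:
--                         lab = [la if v == lb else v for v in lab]
--     sums = {}
--     cnts = {}
--     for j in range(n):
--         for i in range(n):
--             k = lab[j * n + i]
--             sums[k] = sums.get(k, 0) + a[j][i]
--             cnts[k] = cnts.get(k, 0) + 1
--     mapp = [[sums[lab[j * n + i]] // cnts[lab[j * n + i]] for i in range(n)]
--             for j in range(n)]
--     return mapp, sum(cnts.values()) - len(cnts)
-- ===== Notes on version B (the rewrite author's own statement) =====
-- stated objective: alternative
-- what changed: A flood-fills each unvisited cell with a BFS queue and per-component running accumulators; B never traverses: it keeps a flat label array (one label per cell), contracts labels across every qualifying right/down edge by global relabelling, then aggregates per-label sum/count dictionaries in one pass and builds the matrix by comprehension; absorbed cells = total cells minus number of distinct labels.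
import Mathlib
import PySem

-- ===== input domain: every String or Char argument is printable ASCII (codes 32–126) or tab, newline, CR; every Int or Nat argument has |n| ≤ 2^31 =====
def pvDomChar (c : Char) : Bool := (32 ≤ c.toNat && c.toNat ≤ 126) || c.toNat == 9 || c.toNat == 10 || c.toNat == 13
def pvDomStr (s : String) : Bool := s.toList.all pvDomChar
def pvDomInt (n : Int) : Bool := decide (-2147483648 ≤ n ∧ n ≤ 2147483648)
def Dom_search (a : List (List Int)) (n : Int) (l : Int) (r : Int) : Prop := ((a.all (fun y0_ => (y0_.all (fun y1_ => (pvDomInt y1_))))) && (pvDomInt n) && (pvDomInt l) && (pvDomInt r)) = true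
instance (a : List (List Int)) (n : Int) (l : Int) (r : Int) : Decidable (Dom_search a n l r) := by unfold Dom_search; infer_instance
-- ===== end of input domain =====

-- B replaces A's per-seed BFS flood fill by edge-contraction labelling: one label per cell,
-- labels merged across every qualifying right/down edge, then per-label aggregation
-- (objective: alternative). Equivalence is about return values; A mutates only fresh lists.

-- ===== PORT A =====
-- a[y][x] (both Pythons read cells identically); getD 0 is unreachable under Pre_search
-- (out-of-range cell access is exactly where Python raises IndexError).
def pvCell (a : List (List Int)) (x y : Int) : Int :=
  (PySem.List.pyGet? ((PySem.List.pyGet? a y).getD []) x).getD 0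

-- visited[y][x]; out-of-range reads default to `true` (Python would raise there; unreachable
-- under Pre_search since the matrix is n×n and all queries are bounds-checked) — the default
-- also makes the BFS loop's termination measure work without shape hypotheses.
def pvGetV (v : List (List Bool)) (x y : Int) : Bool :=
  (PySem.List.pyGet? ((PySem.List.pyGet? v y).getD []) x).getD true

-- visited[y][x] = True (indices are always ≥ 0 at every call site, so toNat is exact)
def pvSetV (v : List (List Bool)) (x y : Int) : List (List Bool) :=
  v.set y.toNat ((v.getD y.toNat []).set x.toNat true)

-- mapp[y][x] = value
def pvSetM (m : List (List Int)) (x y : Int) (val : Int) : List (List Int) :=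
  m.set y.toNat ((m.getD y.toNat []).set x.toNat val)

def pvDx : List Int := [1, 0, -1, 0]
def pvDy : List Int := [0, 1, 0, -1]

structure PvSt where
  visited : List (List Bool)
  q : List (Int × Int)
  sum : Int
  num : Int
  stop : Int
  index : List (Int × Int)

-- body of A's `for i in range(4)` loop
def pvStepA (a : List (List Int)) (n l r x y : Int) (st : PvSt) (i : Int) : PvSt :=
  if 0 ≤ x + (PySem.List.pyGet? pvDx i).getD 0 ∧ x + (PySem.List.pyGet? pvDx i).getD 0 < n ∧
     0 ≤ y + (PySem.List.pyGet? pvDy i).getD 0 ∧ y + (PySem.List.pyGet? pvDy i).getD 0 < n ∧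
     pvGetV st.visited (x + (PySem.List.pyGet? pvDx i).getD 0) (y + (PySem.List.pyGet? pvDy i).getD 0) = false then
    if l ≤ |pvCell a (x + (PySem.List.pyGet? pvDx i).getD 0) (y + (PySem.List.pyGet? pvDy i).getD 0) - pvCell a x y| ∧
       |pvCell a (x + (PySem.List.pyGet? pvDx i).getD 0) (y + (PySem.List.pyGet? pvDy i).getD 0) - pvCell a x y| ≤ r then
      ⟨pvSetV st.visited (x + (PySem.List.pyGet? pvDx i).getD 0) (y + (PySem.List.pyGet? pvDy i).getD 0),
       st.q ++ [(x + (PySem.List.pyGet? pvDx i).getD 0, y + (PySem.List.pyGet? pvDy i).getD 0)],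
       st.sum + pvCell a (x + (PySem.List.pyGet? pvDx i).getD 0) (y + (PySem.List.pyGet? pvDy i).getD 0),
       st.num + 1, st.stop + 1,
       st.index ++ [(x + (PySem.List.pyGet? pvDx i).getD 0, y + (PySem.List.pyGet? pvDy i).getD 0)]⟩
    else st
  else st

def pvInner (a : List (List Int)) (n l r x y : Int) (st : PvSt) : PvSt :=
  (PySem.List.pyRange 0 4 1).foldl (pvStepA a n l r x y) st

-- termination measure: queue length + number of unvisited entries of the matrix
def pvUnvis (v : List (List Bool)) : Nat := (v.map (fun row => row.count false)).sum

def pvMeasure (st : PvSt) : Nat := st.q.length + pvUnvis st.visited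

lemma pvCount_false_set (row : List Bool) (k : Nat) (h : row[k]? = some false) :
    (row.set k true).count false + 1 = row.count false := by
  induction row generalizing k with
  | nil => simp at h
  | cons b t ih =>
    cases k with
    | zero => simp_all
    | succ k =>
      simp only [List.getElem?_cons_succ] at h
      cases b <;> simp [List.set, ih k h]

lemma pvSum_set {l : List Nat} {k b : Nat} (a : Nat) (h : l[k]? = some b) :
    (l.set k a).sum + b = l.sum + a := by
  induction l generalizing k with
  | nil => simp at h
  | cons c t ih =>
    cases k with
    | zero => simp_all; omega
    | succ k =>
      simp only [List.getElem?_cons_succ] at h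
      have := ih h
      simp only [List.set, List.sum_cons]
      omega

lemma pvGet_nonneg {α : Type} (xs : List α) (i : Int) (h0 : 0 ≤ i) :
    PySem.List.pyGet? xs i = xs[i.toNat]? := by
  simp only [PySem.List.pyGet?, PySem.List.pyIdx?, if_pos h0]
  by_cases h : i < (xs.length : Int)
  · simp [if_pos h]
  · rw [if_neg h, List.getElem?_eq_none (by omega)]; rfl

lemma pvGetV_eq_some (v : List (List Bool)) (x y : Int) (hx : 0 ≤ x) (hy : 0 ≤ y)
    (h : pvGetV v x y = false) :
    ∃ row, v[y.toNat]? = some row ∧ row[x.toNat]? = some false := by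
  unfold pvGetV at h
  rw [pvGet_nonneg v y hy] at h
  cases hrow : v[y.toNat]? with
  | none => rw [hrow] at h; simp [PySem.List.pyGet?, PySem.List.pyIdx?] at h
  | some row =>
    rw [hrow] at h
    simp only [Option.getD_some] at h
    rw [pvGet_nonneg row x hx] at h
    cases hcell : row[x.toNat]? with
    | none => rw [hcell] at h; simp at h
    | some b => rw [hcell] at h; simp at h; exact ⟨row, rfl, by rw [hcell, h]⟩

lemma pvUnvis_setV (v : List (List Bool)) (x y : Int) (hx : 0 ≤ x) (hy : 0 ≤ y)
    (h : pvGetV v x y = false) : pvUnvis (pvSetV v x y) + 1 = pvUnvis v := by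
  obtain ⟨row, hrow, hcell⟩ := pvGetV_eq_some v x y hx hy h
  unfold pvUnvis pvSetV
  rw [List.getD_eq_getElem?_getD, hrow]
  simp only [Option.getD_some, List.map_set]
  have h1 := pvCount_false_set row x.toNat hcell
  have h2 := pvSum_set ((row.set x.toNat true).count false)
    (l := v.map (fun row => row.count false)) (k := y.toNat) (b := row.count false)
    (by rw [List.getElem?_map, hrow]; rfl)
  omega

lemma pvFoldl_measure_le {σ α : Type} (m : σ → Nat) (f : σ → α → σ)
    (h : ∀ s x, m (f s x) ≤ m s) : ∀ (L : List α) (s : σ), m (L.foldl f s) ≤ m s := by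
  intro L
  induction L with
  | nil => intro s; simp
  | cons x t ih => intro s; exact le_trans (ih (f s x)) (h s x)

lemma pvStepA_measure (a : List (List Int)) (n l r x y : Int) (st : PvSt) (i : Int) :
    pvMeasure (pvStepA a n l r x y st i) ≤ pvMeasure st := by
  unfold pvStepA
  split_ifs with h1 h2
  · obtain ⟨hx, _, hy, _, hv⟩ := h1
    have := pvUnvis_setV st.visited _ _ hx hy hv
    simp [pvMeasure]; omega
  · exact le_refl _
  · exact le_refl _

lemma pvInner_measure (a : List (List Int)) (n l r x y : Int) (st : PvSt) :
    pvMeasure (pvInner a n l r x y st) ≤ pvMeasure st :=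
  pvFoldl_measure_le pvMeasure _ (pvStepA_measure a n l r x y) _ st

-- A's `while q:` loop
def pvLoop (a : List (List Int)) (n l r : Int) (st : PvSt) : PvSt :=
  match hq : st.q with
  | [] => st
  | (x, y) :: rest =>
    -- hq is used by the decreasing_by proof below
    pvLoop a n l r (pvInner a n l r x y ⟨st.visited, rest, st.sum, st.num, st.stop, st.index⟩)
termination_by pvMeasure st
decreasing_by
  have h := pvInner_measure a n l r x y ⟨st.visited, rest, st.sum, st.num, st.stop, st.index⟩
  simp [pvMeasure] at h ⊢
  rw [hq]
  simp at h ⊢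
  omega

-- Python bfs(a, visited, mapp, n, l, r, x, y): returns (visited', mapp', value, stop)
def pvBfs (a : List (List Int)) (visited : List (List Bool)) (mapp : List (List Int))
    (n l r x y : Int) : List (List Bool) × List (List Int) × Int × Int :=
  let st := pvLoop a n l r ⟨pvSetV visited x y, [(x, y)], pvCell a x y, 1, 0, [(x, y)]⟩
  let value := PySem.Int.floordiv st.sum st.num
  (st.visited, st.index.foldl (fun m c => pvSetM m c.1 c.2 value) mapp, value, st.stop)

def search (a : List (List Int)) (n : Int) (l : Int) (r : Int) : List (List Int) × Int :=
  let st := (PySem.List.pyRange 0 n 1).foldl (fun s j =>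
      (PySem.List.pyRange 0 n 1).foldl (fun s i =>
        if pvGetV s.1 i j = false then
          let res := pvBfs a s.1 s.2.1 n l r i j
          (res.1, res.2.1, s.2.2 + res.2.2.2)
        else s) s)
    (List.replicate n.toNat (List.replicate n.toNat false),
     List.replicate n.toNat (List.replicate n.toNat (0 : Int)), (0 : Int))
  (st.2.1, st.2.2)

-- ===== PORT B =====
-- one merge step for the candidate edge from cell (i, j) to neighbour d
-- (the indices j*n+i, d.2*n+d.1 are always in range when the guard holds, so pyGetD is exact)
def pvDirStep (a : List (List Int)) (n l r i j : Int) (lab : List Int) (d : Int × Int) : List Int :=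
  if d.1 < n ∧ d.2 < n ∧ l ≤ |pvCell a d.1 d.2 - pvCell a i j| ∧
     |pvCell a d.1 d.2 - pvCell a i j| ≤ r then
    if PySem.List.pyGetD lab (j * n + i) 0 ≠ PySem.List.pyGetD lab (d.2 * n + d.1) 0 then
      lab.map (fun v => if v = PySem.List.pyGetD lab (d.2 * n + d.1) 0
                        then PySem.List.pyGetD lab (j * n + i) 0 else v)
    else lab
  else lab

-- the label-contraction loop of B (`lab` after the triple for-loop)
def pvLabs (a : List (List Int)) (n l r : Int) : List Int :=
  (PySem.List.pyRange 0 n 1).foldl (fun lab j =>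
      (PySem.List.pyRange 0 n 1).foldl (fun lab i =>
        [(i + 1, j), (i, j + 1)].foldl (pvDirStep a n l r i j) lab) lab)
    (PySem.List.pyRange 0 (max n 0 * max n 0) 1)

-- B's aggregation loop: the pair (sums, cnts) after the second double for-loop
def pvAgg (a : List (List Int)) (n : Int) (lab : List Int) :
    PySem.Dict Int Int × PySem.Dict Int Int :=
  (PySem.List.pyRange 0 n 1).foldl (fun sc j =>
      (PySem.List.pyRange 0 n 1).foldl (fun sc i =>
        (PySem.Dict.insert sc.1 (PySem.List.pyGetD lab (j * n + i) 0)
           (PySem.Dict.getD sc.1 (PySem.List.pyGetD lab (j * n + i) 0) 0 + pvCell a i j),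
         PySem.Dict.insert sc.2 (PySem.List.pyGetD lab (j * n + i) 0)
           (PySem.Dict.getD sc.2 (PySem.List.pyGetD lab (j * n + i) 0) 0 + 1))) sc)
    ((PySem.Dict.empty : PySem.Dict Int Int), (PySem.Dict.empty : PySem.Dict Int Int))

def search_alt (a : List (List Int)) (n : Int) (l : Int) (r : Int) : List (List Int) × Int :=
  let lab := pvLabs a n l r
  let sc := pvAgg a n lab
  ((PySem.List.pyRange 0 n 1).map (fun j => (PySem.List.pyRange 0 n 1).map (fun i =>
      PySem.Int.floordiv (PySem.Dict.getD sc.1 (PySem.List.pyGetD lab (j * n + i) 0) 0)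
        (PySem.Dict.getD sc.2 (PySem.List.pyGetD lab (j * n + i) 0) 0))),
   sc.2.values.sum - (sc.2.size : Int))

-- ===== PRECONDITION & SPEC =====
-- Pre_search excludes exactly the inputs where Python A raises IndexError: a positive n with
-- fewer than n rows, or one of the first n rows shorter than n.
def Pre_search (a : List (List Int)) (n : Int) (l : Int) (r : Int) : Prop :=
  0 < n → (n ≤ (a.length : Int) ∧ ∀ row ∈ a.take n.toNat, n ≤ (row.length : Int))
instance (a : List (List Int)) (n : Int) (l : Int) (r : Int) : Decidable (Pre_search a n l r) := by
  unfold Pre_search; infer_instance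

def pvWitness_search : List (List Int) × Int × Int × Int := ([[1, 2], [3, 10]], 2, 1, 3)

def Spec_search (a : List (List Int)) (n : Int) (l : Int) (r : Int) (out : List (List Int) × Int) : Prop := out = search_alt a n l r
instance (a : List (List Int)) (n : Int) (l : Int) (r : Int) (out : List (List Int) × Int) : Decidable (Spec_search a n l r out) := by unfold Spec_search; infer_instance

-- ===== CLAIM (what is proved, stated in full; the proofs are below) =====
def Claim_equal_search : Prop := ∀ (a : List (List Int)) (n : Int) (l : Int) (r : Int), Dom_search a n l r → Pre_search a n l r → Spec_search a n l r (search a n l r)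

-- ===== LEMMAS AND PROOFS =====

-- the grid cells in row-major order (y outer, x inner), as both outer loops traverse them
def pvAllCells (n : Int) : List (Int × Int) :=
  (PySem.List.pyRange 0 n 1).flatMap (fun y => (PySem.List.pyRange 0 n 1).map (fun x => (x, y)))

lemma pvMem_allCells (n x y : Int) :
    (x, y) ∈ pvAllCells n ↔ 0 ≤ x ∧ x < n ∧ 0 ≤ y ∧ y < n := by
  unfold pvAllCells
  simp only [List.mem_flatMap, List.mem_map, PySem.List.mem_pyRange_one, Prod.mk.injEq]
  constructor
  · rintro ⟨y', hy', x', hx', he1, he2⟩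
    subst he1; subst he2
    exact ⟨hx'.1, hx'.2, hy'.1, hy'.2⟩
  · rintro ⟨h1, h2, h3, h4⟩
    exact ⟨y, ⟨h3, h4⟩, x, ⟨h1, h2⟩, rfl, rfl⟩

lemma pvNodup_allCells (n : Int) : (pvAllCells n).Nodup := by
  unfold pvAllCells
  rw [PySem.List.pyRange_one, List.nodup_flatMap]
  constructor
  · intro y _
    refine List.Nodup.map ?_ (List.Nodup.map (fun a b h => by omega) List.nodup_range)
    intro a b h
    exact congrArg Prod.fst h
  · rw [List.pairwise_map]
    refine List.Pairwise.imp ?_ List.nodup_range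
    intro y1 y2 hne
    simp only [Function.onFun, List.disjoint_left]
    rintro ⟨u, v⟩ h1 h2
    simp only [List.mem_map] at h1 h2
    obtain ⟨x1, _, he1⟩ := h1
    obtain ⟨x2, _, he2⟩ := h2
    apply hne
    have h3 := congrArg Prod.snd (he1.trans he2.symm)
    simp only at h3
    omega

-- in-grid predicate
def pvInG (n : Int) (c : Int × Int) : Prop := 0 ≤ c.1 ∧ c.1 < n ∧ 0 ≤ c.2 ∧ c.2 < n

lemma pvMem_allCells' (n : Int) (c : Int × Int) : c ∈ pvAllCells n ↔ pvInG n c := by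
  obtain ⟨x, y⟩ := c
  exact pvMem_allCells n x y

-- the (symmetric) adjacency relation both programs test
def pvE (a : List (List Int)) (n l r : Int) (c d : Int × Int) : Prop :=
  pvInG n c ∧ pvInG n d ∧
  ((d.1 - c.1 = 1 ∧ d.2 = c.2) ∨ (d.1 = c.1 ∧ d.2 - c.2 = 1) ∨
   (d.1 - c.1 = -1 ∧ d.2 = c.2) ∨ (d.1 = c.1 ∧ d.2 - c.2 = -1)) ∧
  l ≤ |pvCell a d.1 d.2 - pvCell a c.1 c.2| ∧ |pvCell a d.1 d.2 - pvCell a c.1 c.2| ≤ r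

lemma pvE_symm (a : List (List Int)) (n l r : Int) : Symmetric (pvE a n l r) := by
  rintro c d ⟨h1, h2, h3, h4, h5⟩
  rw [abs_sub_comm] at h4 h5
  exact ⟨h2, h1, by omega, h4, h5⟩

-- connectivity = reflexive-transitive closure of adjacency
def pvConn (a : List (List Int)) (n l r : Int) (c d : Int × Int) : Prop :=
  Relation.ReflTransGen (pvE a n l r) c d

lemma pvConn_symm (a : List (List Int)) (n l r : Int) {c d : Int × Int}
    (h : pvConn a n l r c d) : pvConn a n l r d c :=
  Relation.ReflTransGen.symmetric (pvE_symm a n l r) h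

-- the connected component of c, as the row-major sublist of the grid
noncomputable def pvComp (a : List (List Int)) (n l r : Int) (c : Int × Int) : List (Int × Int) :=
  (pvAllCells n).filter (fun d => @decide (pvConn a n l r c d) (Classical.propDecidable _))

lemma pvMem_comp (a : List (List Int)) (n l r : Int) (c d : Int × Int) :
    d ∈ pvComp a n l r c ↔ pvInG n d ∧ pvConn a n l r c d := by
  simp only [pvComp, List.mem_filter, decide_eq_true_eq, pvMem_allCells']

lemma pvNodup_comp (a : List (List Int)) (n l r : Int) (c : Int × Int) :
    (pvComp a n l r c).Nodup := (pvNodup_allCells n).filter _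

lemma pvComp_eq_of_conn (a : List (List Int)) (n l r : Int) {c d : Int × Int}
    (h : pvConn a n l r c d) : pvComp a n l r c = pvComp a n l r d := by
  unfold pvComp
  apply List.filter_congr
  intro z _
  simp only [decide_eq_decide]
  constructor
  · intro hz; exact Relation.ReflTransGen.trans (pvConn_symm a n l r h) hz
  · intro hz; exact Relation.ReflTransGen.trans h hz

lemma pvSelf_mem_comp (a : List (List Int)) (n l r : Int) (c : Int × Int) (hc : pvInG n c) :
    c ∈ pvComp a n l r c := (pvMem_comp a n l r c c).mpr ⟨hc, Relation.ReflTransGen.refl⟩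

-- the component value both programs assign to every cell of a component
noncomputable def pvVal (a : List (List Int)) (n l r : Int) (c : Int × Int) : Int :=
  PySem.Int.floordiv (((pvComp a n l r c).map (fun z => pvCell a z.1 z.2)).sum)
    ((pvComp a n l r c).length : Int)

lemma pvVal_eq_of_conn (a : List (List Int)) (n l r : Int) {c d : Int × Int}
    (h : pvConn a n l r c d) : pvVal a n l r c = pvVal a n l r d := by
  unfold pvVal
  rw [pvComp_eq_of_conn a n l r h]

-- ==== B side: the final labels of pvLabs identify exactly the connected components ====

-- the label B stores for cell c
def pvLabF (n : Int) (lab : List Int) (c : Int × Int) : Int :=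
  PySem.List.pyGetD lab (c.2 * n + c.1) 0

lemma pvLabF_pair (n : Int) (lab : List Int) (i j : Int) :
    PySem.List.pyGetD lab (j * n + i) 0 = pvLabF n lab (i, j) := rfl

lemma pvIdx_bounds (n : Int) (c : Int × Int) (hc : pvInG n c) :
    0 ≤ c.2 * n + c.1 ∧ c.2 * n + c.1 < n * n := by
  obtain ⟨h1, h2, h3, h4⟩ := hc
  constructor
  · nlinarith
  · nlinarith

lemma pvIdx_inj (n : Int) (c d : Int × Int) (hc : pvInG n c) (hd : pvInG n d)
    (h : c.2 * n + c.1 = d.2 * n + d.1) : c = d := by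
  obtain ⟨h1, h2, h3, h4⟩ := hc; obtain ⟨g1, g2, g3, g4⟩ := hd
  have h5 : c.2 = d.2 := by
    rcases lt_trichotomy c.2 d.2 with hlt | he | hgt
    · nlinarith
    · exact he
    · nlinarith
  have h6 : c.1 = d.1 := by rw [h5] at h; linarith
  exact Prod.ext h6 h5

lemma pvLabF_map (n : Int) (lab : List Int) (f : Int → Int) (c : Int × Int)
    (hlen0 : lab.length = (max n 0 * max n 0).toNat) (hc : pvInG n c) :
    pvLabF n (lab.map f) c = f (pvLabF n lab c) := by
  have hn : 0 < n := lt_of_le_of_lt hc.1 hc.2.1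
  have hlen : lab.length = (n * n).toNat := by rw [hlen0, max_eq_left hn.le]
  have hb := pvIdx_bounds n c hc
  unfold pvLabF
  rw [PySem.List.pyGetD_eq_getElem _ _ hb.1 (by simp [hlen]; omega),
      PySem.List.pyGetD_eq_getElem _ _ hb.1 (by simp [hlen]; omega),
      List.getElem_map]

-- invariant: labels are a refinement of connectivity (equal labels ⇒ connected)
def pvGoodLab (a : List (List Int)) (n l r : Int) (lab : List Int) : Prop :=
  lab.length = (max n 0 * max n 0).toNat ∧
  ∀ c d, pvInG n c → pvInG n d → pvLabF n lab c = pvLabF n lab d → pvConn a n l r c d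

-- merge steps never separate labels that are already equal
def pvMono (n : Int) (lab lab' : List Int) : Prop :=
  ∀ c d, pvInG n c → pvInG n d → pvLabF n lab c = pvLabF n lab d →
    pvLabF n lab' c = pvLabF n lab' d

lemma pvGoodLab_init (a : List (List Int)) (n l r : Int) :
    pvGoodLab a n l r (PySem.List.pyRange 0 (max n 0 * max n 0) 1) := by
  have hlen0 : (PySem.List.pyRange 0 (max n 0 * max n 0) 1).length
      = (max n 0 * max n 0).toNat := by
    rw [PySem.List.length_pyRange_one]; simp
  refine ⟨hlen0, ?_⟩
  intro c d hc hd heq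
  have hn : 0 < n := lt_of_le_of_lt hc.1 hc.2.1
  have hlen : (PySem.List.pyRange 0 (max n 0 * max n 0) 1).length = (n * n).toNat := by
    rw [hlen0, max_eq_left hn.le]
  have hbc := pvIdx_bounds n c hc
  have hbd := pvIdx_bounds n d hd
  unfold pvLabF at heq
  rw [PySem.List.pyGetD_eq_getElem _ _ hbc.1 (by rw [hlen]; omega),
      PySem.List.pyGetD_eq_getElem _ _ hbd.1 (by rw [hlen]; omega),
      PySem.List.getElem_pyRange_one, PySem.List.getElem_pyRange_one] at heq
  have : c.2 * n + c.1 = d.2 * n + d.1 := by omega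
  rw [pvIdx_inj n c d hc hd this]
  exact Relation.ReflTransGen.refl

lemma pvDirStep_spec (a : List (List Int)) (n l r i j : Int) (lab : List Int) (d : Int × Int)
    (hgood : pvGoodLab a n l r lab) (hc : pvInG n (i, j)) (h1 : 0 ≤ d.1) (h2 : 0 ≤ d.2)
    (hadj : (d.1 - i = 1 ∧ d.2 = j) ∨ (d.1 = i ∧ d.2 - j = 1)) :
    pvGoodLab a n l r (pvDirStep a n l r i j lab d) ∧
    pvMono n lab (pvDirStep a n l r i j lab d) ∧
    (pvE a n l r (i, j) d →
      pvLabF n (pvDirStep a n l r i j lab d) (i, j) = pvLabF n (pvDirStep a n l r i j lab d) d) := by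
  unfold pvDirStep
  simp only [pvLabF_pair]
  rw [show ((d.1, d.2) : Int × Int) = d from rfl]
  by_cases hguard : d.1 < n ∧ d.2 < n ∧ l ≤ |pvCell a d.1 d.2 - pvCell a i j| ∧
      |pvCell a d.1 d.2 - pvCell a i j| ≤ r
  · rw [if_pos hguard]
    have hind : pvInG n d := ⟨h1, hguard.1, h2, hguard.2.1⟩
    have hadj' : (d.1 - (i, j).1 = 1 ∧ d.2 = (i, j).2) ∨ (d.1 = (i, j).1 ∧ d.2 - (i, j).2 = 1) ∨
        (d.1 - (i, j).1 = -1 ∧ d.2 = (i, j).2) ∨ (d.1 = (i, j).1 ∧ d.2 - (i, j).2 = -1) := by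
      rcases hadj with ⟨u, v⟩ | ⟨u, v⟩
      · exact Or.inl ⟨u, v⟩
      · exact Or.inr (Or.inl ⟨u, v⟩)
    have hE' : pvE a n l r (i, j) d := ⟨hc, hind, hadj', hguard.2.2.1, hguard.2.2.2⟩
    by_cases hne : pvLabF n lab (i, j) ≠ pvLabF n lab d
    · rw [if_pos hne]
      have hmap : ∀ z, pvInG n z →
          pvLabF n (lab.map (fun v => if v = pvLabF n lab d then pvLabF n lab (i, j) else v)) z
          = (fun v => if v = pvLabF n lab d then pvLabF n lab (i, j) else v) (pvLabF n lab z) :=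
        fun z hz => pvLabF_map n lab _ z hgood.1 hz
      refine ⟨⟨by simp [hgood.1], ?_⟩, ?_, ?_⟩
      · -- good preserved
        intro c0 d0 hc0 hd0 heq
        rw [hmap c0 hc0, hmap d0 hd0] at heq
        simp only at heq
        by_cases hz : pvLabF n lab c0 = pvLabF n lab d <;>
          by_cases hw : pvLabF n lab d0 = pvLabF n lab d
        · exact hgood.2 c0 d0 hc0 hd0 (hz.trans hw.symm)
        · rw [if_pos hz, if_neg hw] at heq
          have hconn1 : pvConn a n l r c0 d := hgood.2 c0 d hc0 hind hz
          have hconn2 : pvConn a n l r (i, j) d0 := hgood.2 (i, j) d0 hc hd0 heq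
          exact Relation.ReflTransGen.trans
            (hconn1.trans (Relation.ReflTransGen.single (pvE_symm a n l r hE'))) hconn2
        · rw [if_neg hz, if_pos hw] at heq
          have hconn1 : pvConn a n l r d0 d := hgood.2 d0 d hd0 hind hw
          have hconn2 : pvConn a n l r (i, j) c0 := hgood.2 (i, j) c0 hc hc0 heq.symm
          exact pvConn_symm a n l r (Relation.ReflTransGen.trans
            (hconn1.trans (Relation.ReflTransGen.single (pvE_symm a n l r hE'))) hconn2)
        · rw [if_neg hz, if_neg hw] at heq
          exact hgood.2 c0 d0 hc0 hd0 heq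
      · -- monotone
        intro c0 d0 hc0 hd0 heq
        rw [hmap c0 hc0, hmap d0 hd0, heq]
      · -- this edge now has equal labels
        intro _
        rw [hmap (i, j) hc, hmap d hind]
        simp [hne]
    · rw [if_neg hne]
      exact ⟨hgood, fun _ _ _ _ h => h, fun _ => not_ne_iff.mp hne⟩
  · rw [if_neg hguard]
    refine ⟨hgood, fun _ _ _ _ h => h, ?_⟩
    intro hE
    exact absurd ⟨hE.2.1.2.1, hE.2.1.2.2.2, hE.2.2.2.1, hE.2.2.2.2⟩ hguard

-- the per-cell step of the label loop (the two candidate edges of cell c)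
def pvCellStepB (a : List (List Int)) (n l r : Int) (lab : List Int) (c : Int × Int) : List Int :=
  [(c.1 + 1, c.2), (c.1, c.2 + 1)].foldl (pvDirStep a n l r c.1 c.2) lab

lemma pvLabs_eq_foldl (a : List (List Int)) (n l r : Int) :
    pvLabs a n l r = (pvAllCells n).foldl (pvCellStepB a n l r)
      (PySem.List.pyRange 0 (max n 0 * max n 0) 1) := by
  unfold pvLabs pvAllCells pvCellStepB
  rw [List.foldl_flatMap]
  simp only [List.foldl_map]

lemma pvCellStepB_spec (a : List (List Int)) (n l r : Int) (lab : List Int) (c : Int × Int)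
    (hgood : pvGoodLab a n l r lab) (hc : pvInG n c) :
    pvGoodLab a n l r (pvCellStepB a n l r lab c) ∧
    pvMono n lab (pvCellStepB a n l r lab c) ∧
    (pvE a n l r c (c.1 + 1, c.2) →
      pvLabF n (pvCellStepB a n l r lab c) c = pvLabF n (pvCellStepB a n l r lab c) (c.1 + 1, c.2)) ∧
    (pvE a n l r c (c.1, c.2 + 1) →
      pvLabF n (pvCellStepB a n l r lab c) c = pvLabF n (pvCellStepB a n l r lab c) (c.1, c.2 + 1)) := by
  have hcpair : c = (c.1, c.2) := rfl
  have h1 := pvDirStep_spec a n l r c.1 c.2 lab (c.1 + 1, c.2) hgood (hcpair ▸ hc)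
    (by have := hc.1; simp; omega) (by exact hc.2.2.1) (by left; constructor <;> omega)
  set lab1 := pvDirStep a n l r c.1 c.2 lab (c.1 + 1, c.2) with hlab1
  have h2 := pvDirStep_spec a n l r c.1 c.2 lab1 (c.1, c.2 + 1) h1.1 (hcpair ▸ hc)
    (by exact hc.1) (by have := hc.2.2.1; simp; omega) (by right; constructor <;> omega)
  have hres : pvCellStepB a n l r lab c = pvDirStep a n l r c.1 c.2 lab1 (c.1, c.2 + 1) := rfl
  rw [hres]
  refine ⟨h2.1, fun c0 d0 hc0 hd0 h => h2.2.1 c0 d0 hc0 hd0 (h1.2.1 c0 d0 hc0 hd0 h), ?_, ?_⟩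
  · intro hE
    exact h2.2.1 c (c.1 + 1, c.2) hc hE.2.1 (h1.2.2 hE)
  · intro hE
    exact h2.2.2 hE

lemma pvFoldl_cellStepB (a : List (List Int)) (n l r : Int) (L : List (Int × Int))
    (hL : ∀ c ∈ L, pvInG n c) : ∀ lab, pvGoodLab a n l r lab →
    pvGoodLab a n l r (L.foldl (pvCellStepB a n l r) lab) ∧
    pvMono n lab (L.foldl (pvCellStepB a n l r) lab) := by
  induction L with
  | nil => exact fun lab h => ⟨h, fun _ _ _ _ hh => hh⟩
  | cons c t ih =>
    intro lab hgood
    have hstep := pvCellStepB_spec a n l r lab c hgood (hL c List.mem_cons_self)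
    have hrest := ih (fun z hz => hL z (List.mem_cons_of_mem c hz)) _ hstep.1
    exact ⟨hrest.1,
      fun c0 d0 hc0 hd0 h => hrest.2 c0 d0 hc0 hd0 (hstep.2.1 c0 d0 hc0 hd0 h)⟩

lemma pvLabs_good (a : List (List Int)) (n l r : Int) : pvGoodLab a n l r (pvLabs a n l r) := by
  rw [pvLabs_eq_foldl]
  exact (pvFoldl_cellStepB a n l r (pvAllCells n)
    (fun c hc => (pvMem_allCells' n c).mp hc) _ (pvGoodLab_init a n l r)).1

lemma pvLabs_cell_edges (a : List (List Int)) (n l r : Int) (c : Int × Int)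
    (hc : c ∈ pvAllCells n) :
    (pvE a n l r c (c.1 + 1, c.2) →
      pvLabF n (pvLabs a n l r) c = pvLabF n (pvLabs a n l r) (c.1 + 1, c.2)) ∧
    (pvE a n l r c (c.1, c.2 + 1) →
      pvLabF n (pvLabs a n l r) c = pvLabF n (pvLabs a n l r) (c.1, c.2 + 1)) := by
  obtain ⟨P, S, hsplit⟩ := List.append_of_mem hc
  have hmemP : ∀ z ∈ P, pvInG n z := fun z hz =>
    (pvMem_allCells' n z).mp (by rw [hsplit]; exact List.mem_append_left _ hz)
  have hmemS : ∀ z ∈ S, pvInG n z := fun z hz =>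
    (pvMem_allCells' n z).mp (by rw [hsplit]; exact List.mem_append_right _ (List.mem_cons_of_mem c hz))
  have hcin : pvInG n c := (pvMem_allCells' n c).mp hc
  rw [pvLabs_eq_foldl, hsplit, List.foldl_append, List.foldl_cons]
  have hgood1 := (pvFoldl_cellStepB a n l r P hmemP _ (pvGoodLab_init a n l r)).1
  have hstep := pvCellStepB_spec a n l r _ c hgood1 hcin
  have hrest := pvFoldl_cellStepB a n l r S hmemS _ hstep.1
  constructor
  · intro hE
    exact hrest.2 c (c.1 + 1, c.2) hcin hE.2.1 (hstep.2.2.1 hE)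
  · intro hE
    exact hrest.2 c (c.1, c.2 + 1) hcin hE.2.1 (hstep.2.2.2 hE)

lemma pvLabs_edge (a : List (List Int)) (n l r : Int) (u w : Int × Int)
    (hE : pvE a n l r u w) : pvLabF n (pvLabs a n l r) u = pvLabF n (pvLabs a n l r) w := by
  have hu : u ∈ pvAllCells n := (pvMem_allCells' n u).mpr hE.1
  have hw : w ∈ pvAllCells n := (pvMem_allCells' n w).mpr hE.2.1
  rcases hE.2.2.1 with ⟨p, q⟩ | ⟨p, q⟩ | ⟨p, q⟩ | ⟨p, q⟩
  · have hww : w = (u.1 + 1, u.2) := Prod.ext (by omega) q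
    rw [hww] at hE ⊢
    exact (pvLabs_cell_edges a n l r u hu).1 hE
  · have hww : w = (u.1, u.2 + 1) := Prod.ext p (by omega)
    rw [hww] at hE ⊢
    exact (pvLabs_cell_edges a n l r u hu).2 hE
  · have huu : u = (w.1 + 1, w.2) := Prod.ext (by omega) q.symm
    rw [huu] at hE ⊢
    exact ((pvLabs_cell_edges a n l r w hw).1 (pvE_symm a n l r hE)).symm
  · have huu : u = (w.1, w.2 + 1) := Prod.ext p.symm (by omega)
    rw [huu] at hE ⊢
    exact ((pvLabs_cell_edges a n l r w hw).2 (pvE_symm a n l r hE)).symm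

-- the central fact about B's labels: equal label ⟺ connected
lemma pvLabF_iff_conn (a : List (List Int)) (n l r : Int) (u w : Int × Int)
    (hu : pvInG n u) (hw : pvInG n w) :
    pvLabF n (pvLabs a n l r) u = pvLabF n (pvLabs a n l r) w ↔ pvConn a n l r u w := by
  constructor
  · exact (pvLabs_good a n l r).2 u w hu hw
  · intro h
    clear hu hw
    induction h with
    | refl => rfl
    | tail _ he ih => exact ih.trans (pvLabs_edge a n l r _ _ he)

-- ==== B side: aggregation phase ====

lemma pvAgg_eq_foldl (a : List (List Int)) (n : Int) (lab : List Int) :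
    pvAgg a n lab = (pvAllCells n).foldl (fun sc c =>
      (sc.1.insert (pvLabF n lab c) (sc.1.getD (pvLabF n lab c) 0 + pvCell a c.1 c.2),
       sc.2.insert (pvLabF n lab c) (sc.2.getD (pvLabF n lab c) 0 + 1)))
      ((PySem.Dict.empty : PySem.Dict Int Int), (PySem.Dict.empty : PySem.Dict Int Int)) := by
  unfold pvAgg pvAllCells
  rw [List.foldl_flatMap]
  simp only [List.foldl_map]
  rfl

lemma pvAgg_fst (a : List (List Int)) (n : Int) (lab : List Int) :
    (pvAgg a n lab).1 = (pvAllCells n).foldl (fun d c =>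
      d.insert (pvLabF n lab c) (d.getD (pvLabF n lab c) 0 + pvCell a c.1 c.2))
      (PySem.Dict.empty : PySem.Dict Int Int) := by
  rw [pvAgg_eq_foldl,
    PySem.List.foldl_prod_mk
      (f := fun d c => PySem.Dict.insert d (pvLabF n lab c)
        (PySem.Dict.getD d (pvLabF n lab c) 0 + pvCell a c.1 c.2))
      (g := fun d c => PySem.Dict.insert d (pvLabF n lab c)
        (PySem.Dict.getD d (pvLabF n lab c) 0 + 1))]

lemma pvAgg_snd (a : List (List Int)) (n : Int) (lab : List Int) :
    (pvAgg a n lab).2 = PySem.Dict.counter ((pvAllCells n).map (pvLabF n lab)) := by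
  rw [pvAgg_eq_foldl,
    PySem.List.foldl_prod_mk
      (f := fun d c => PySem.Dict.insert d (pvLabF n lab c)
        (PySem.Dict.getD d (pvLabF n lab c) 0 + pvCell a c.1 c.2))
      (g := fun d c => PySem.Dict.insert d (pvLabF n lab c)
        (PySem.Dict.getD d (pvLabF n lab c) 0 + 1)),
    ← PySem.Dict.foldl_insert_getD_add_one_eq_counter, List.foldl_map]

-- a grouped-sum loop: getD of the final dict is the sum of the weights in k's group
lemma pvGetD_foldl_insert_add (L : List (Int × Int)) (key : (Int × Int) → Int)
    (wt : (Int × Int) → Int) : ∀ (d : PySem.Dict Int Int) (k : Int),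
    (L.foldl (fun d c => d.insert (key c) (d.getD (key c) 0 + wt c)) d).getD k 0
      = d.getD k 0 + ((L.filter (fun c => key c == k)).map wt).sum := by
  induction L with
  | nil => simp
  | cons c t ih =>
    intro d k
    rw [List.foldl_cons, ih, List.filter_cons]
    by_cases hk : key c = k
    · rw [if_pos (by simp [hk]), PySem.Dict.getD_insert, if_pos hk.symm, hk]
      simp only [List.map_cons, List.sum_cons]
      ring
    · rw [if_neg (by simp [hk]), PySem.Dict.getD_insert, if_neg (fun he => hk he.symm)]

-- B's per-cell group (equal final label) is exactly the component
lemma pvFilter_label_eq_comp (a : List (List Int)) (n l r : Int) (c : Int × Int)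
    (hc : pvInG n c) :
    (pvAllCells n).filter
        (fun z => pvLabF n (pvLabs a n l r) z == pvLabF n (pvLabs a n l r) c)
      = pvComp a n l r c := by
  unfold pvComp
  apply List.filter_congr
  intro z hz
  have hzin : pvInG n z := (pvMem_allCells' n z).mp hz
  apply Bool.eq_iff_iff.mpr
  simp only [beq_iff_eq, decide_eq_true_eq]
  rw [pvLabF_iff_conn a n l r z c hzin hc]
  exact ⟨fun h => pvConn_symm a n l r h, fun h => pvConn_symm a n l r h⟩

lemma pvComp_eq_iff_conn (a : List (List Int)) (n l r : Int) (z w : Int × Int)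
    (hz : pvInG n z) (hw : pvInG n w) :
    pvComp a n l r z = pvComp a n l r w ↔ pvConn a n l r z w := by
  constructor
  · intro h
    have : w ∈ pvComp a n l r z := h ▸ pvSelf_mem_comp a n l r w hw
    exact ((pvMem_comp a n l r z w).mp this).2
  · exact pvComp_eq_of_conn a n l r

-- fibers with the same equality pattern have the same number of distinct values
lemma pvCard_map_eq {α β γ : Type} [DecidableEq β] [DecidableEq γ] (L : List α)
    (f : α → β) (g : α → γ) (h : ∀ x ∈ L, ∀ y ∈ L, (f x = f y ↔ g x = g y)) :
    (L.map f).toFinset.card = (L.map g).toFinset.card := by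
  induction L with
  | nil => simp
  | cons x t ih =>
    simp only [List.map_cons, List.toFinset_cons]
    have hmem : f x ∈ (t.map f).toFinset ↔ g x ∈ (t.map g).toFinset := by
      simp only [List.mem_toFinset, List.mem_map]
      constructor
      · rintro ⟨y, hy, he⟩
        exact ⟨y, hy, (h y (List.mem_cons_of_mem x hy) x List.mem_cons_self).mp he⟩
      · rintro ⟨y, hy, he⟩
        exact ⟨y, hy, (h y (List.mem_cons_of_mem x hy) x List.mem_cons_self).mpr he⟩
    have hsub : ∀ x' ∈ t, ∀ y' ∈ t, (f x' = f y' ↔ g x' = g y') :=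
      fun x' hx' y' hy' => h x' (List.mem_cons_of_mem x hx') y' (List.mem_cons_of_mem x hy')
    by_cases hf : f x ∈ (t.map f).toFinset
    · rw [Finset.insert_eq_self.mpr hf, Finset.insert_eq_self.mpr (hmem.mp hf)]
      exact ih hsub
    · rw [Finset.card_insert_of_notMem hf,
        Finset.card_insert_of_notMem (fun hg => hf (hmem.mpr hg)), ih hsub]

-- the number of connected components
noncomputable def pvNcomp (a : List (List Int)) (n l r : Int) : Nat :=
  ((pvAllCells n).map (pvComp a n l r)).toFinset.card

lemma pvSum_counts (xs : List Int) :
    ((PySem.Set.ofList xs).map (fun k => ((xs.count k : Int)))).sum = (xs.length : Int) := by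
  have hperm : (PySem.Set.ofList xs).Perm xs.dedup :=
    (List.perm_ext_iff_of_nodup (PySem.Set.nodup_ofList xs) xs.nodup_dedup).mpr
      (fun k => by rw [PySem.Set.mem_ofList, List.mem_dedup])
  have := (hperm.map (fun k => ((xs.count k : Int)))).sum_eq
  rw [this]
  have hcast : (xs.dedup.map (fun k => ((xs.count k : Int)))).sum
      = ((xs.dedup.map (fun k => xs.count k)).sum : Int) := by
    induction xs.dedup with
    | nil => simp
    | cons y t ih => simp [ih]
  rw [hcast, List.sum_map_count_dedup_eq_length]

lemma pvSize_counter (xs : List Int) :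
    (PySem.Dict.counter xs).size = xs.toFinset.card := by
  have h1 : (PySem.Dict.counter xs).size = (PySem.Dict.counter xs).items.length := rfl
  rw [h1, PySem.Dict.items_counter, List.length_map]
  have h2 : (PySem.Set.ofList xs).toFinset = xs.toFinset := by
    ext k
    simp [PySem.Set.mem_ofList]
  rw [← List.toFinset_card_of_nodup (PySem.Set.nodup_ofList xs), h2]

-- B's characterization: the value matrix and (#cells − #components)
lemma search_alt_char (a : List (List Int)) (n l r : Int) :
    search_alt a n l r =
      ((PySem.List.pyRange 0 n 1).map (fun j => (PySem.List.pyRange 0 n 1).map (fun i =>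
          pvVal a n l r (i, j))),
       ((pvAllCells n).length : Int) - (pvNcomp a n l r : Int)) := by
  unfold search_alt
  dsimp only
  rw [Prod.ext_iff]
  constructor
  · -- the matrix
    apply List.map_congr_left
    intro j hj
    apply List.map_congr_left
    intro i hi
    rw [PySem.List.mem_pyRange_one] at hj hi
    have hc : pvInG n (i, j) := ⟨hi.1, hi.2, hj.1, hj.2⟩
    rw [pvLabF_pair, pvAgg_fst, pvAgg_snd,
      pvGetD_foldl_insert_add (pvAllCells n) (pvLabF n (pvLabs a n l r))
        (fun c => pvCell a c.1 c.2) PySem.Dict.empty,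
      PySem.Dict.getD_counter]
    have hcount : List.count (pvLabF n (pvLabs a n l r) (i, j))
        ((pvAllCells n).map (pvLabF n (pvLabs a n l r)))
        = ((pvAllCells n).filter (fun z =>
            pvLabF n (pvLabs a n l r) z == pvLabF n (pvLabs a n l r) (i, j))).length := by
      rw [List.count, List.countP_map, List.countP_eq_length_filter]
      rfl
    rw [hcount, pvFilter_label_eq_comp a n l r (i, j) hc]
    simp only [PySem.Dict.getD_empty, zero_add]
    rfl
  · -- the absorbed-cells count
    rw [pvAgg_snd]
    have hv : (PySem.Dict.counter ((pvAllCells n).map (pvLabF n (pvLabs a n l r)))).values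
        = ((PySem.Dict.counter ((pvAllCells n).map (pvLabF n (pvLabs a n l r)))).items.map
            Prod.snd) := rfl
    rw [hv, PySem.Dict.items_counter, List.map_map]
    have hsum := pvSum_counts ((pvAllCells n).map (pvLabF n (pvLabs a n l r)))
    simp only [Function.comp_def]
    rw [hsum, List.length_map, pvSize_counter]
    have hcard : ((pvAllCells n).map (pvLabF n (pvLabs a n l r))).toFinset.card
        = pvNcomp a n l r := by
      apply pvCard_map_eq
      intro z hz w hw
      rw [pvMem_allCells'] at hz hw
      rw [pvLabF_iff_conn a n l r z w hz hw, pvComp_eq_iff_conn a n l r z w hz hw]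
    rw [hcard]

-- ==== A side: matrix and visited-matrix plumbing ====

def pvShape {α : Type} (m : List (List α)) (n : Int) : Prop :=
  m.length = n.toNat ∧ ∀ row ∈ m, row.length = n.toNat

def pvGetM (m : List (List Int)) (c : Int × Int) : Int :=
  (m.getD c.2.toNat []).getD c.1.toNat 0

-- pointwise view of A's visited matrix
def pvMatchP (n : Int) (vm : List (List Bool)) (W : Int × Int → Prop) : Prop :=
  pvShape vm n ∧ ∀ c, pvInG n c → (pvGetV vm c.1 c.2 = false ↔ ¬ W c)

lemma pvGetV_char (vm : List (List Bool)) (x y : Int) (hx : 0 ≤ x) (hy : 0 ≤ y) :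
    pvGetV vm x y = ((vm[y.toNat]?.getD [])[x.toNat]?).getD true := by
  unfold pvGetV
  rw [pvGet_nonneg _ y hy, pvGet_nonneg _ x hx]

lemma pvMatchP_congr (n : Int) (vm : List (List Bool)) (W W' : Int × Int → Prop)
    (h : pvMatchP n vm W) (hiff : ∀ c, pvInG n c → (W c ↔ W' c)) : pvMatchP n vm W' := by
  refine ⟨h.1, fun c hc => ?_⟩
  rw [h.2 c hc, not_iff_not]
  exact hiff c hc

lemma pvMatchP_init (n : Int) :
    pvMatchP n (List.replicate n.toNat (List.replicate n.toNat false)) (fun _ => False) := by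
  refine ⟨⟨by simp, fun row hrow => by rw [List.eq_of_mem_replicate hrow]; simp⟩, ?_⟩
  intro c hc
  obtain ⟨h1, h2, h3, h4⟩ := hc
  have hfalse : pvGetV (List.replicate n.toNat (List.replicate n.toNat false)) c.1 c.2 = false := by
    rw [pvGetV_char _ _ _ h1 h3, List.getElem?_replicate, if_pos (by omega)]
    simp only [Option.getD_some]
    rw [List.getElem?_replicate, if_pos (by omega)]
    rfl
  simp [hfalse]

lemma pvMatchP_set (n : Int) (vm : List (List Bool)) (W : Int × Int → Prop) (x y : Int)
    (hM : pvMatchP n vm W) (hin : pvInG n (x, y)) :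
    pvMatchP n (pvSetV vm x y) (fun z => W z ∨ z = (x, y)) := by
  obtain ⟨⟨hlen, hrows⟩, hpt⟩ := hM
  obtain ⟨hx, hx', hy, hy'⟩ := hin
  have hyN : y.toNat < vm.length := by omega
  have hrowy : vm.getD y.toNat [] = vm[y.toNat] := by
    rw [List.getD_eq_getElem?_getD, List.getElem?_eq_getElem hyN]
    rfl
  have hrowlen : vm[y.toNat].length = n.toNat := hrows _ (List.getElem_mem hyN)
  refine ⟨⟨by simp [pvSetV, hlen], ?_⟩, ?_⟩
  · intro row hrow
    rcases List.mem_or_eq_of_mem_set hrow with h | h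
    · exact hrows row h
    · rw [h, hrowy]
      simp [hrowlen]
  · intro c hc
    obtain ⟨hu, hu', hv, hv'⟩ := hc
    rw [pvGetV_char _ _ _ hu hv]
    unfold pvSetV
    rw [List.getElem?_set]
    by_cases hvy : y.toNat = c.2.toNat
    · have hvy' : c.2 = y := by omega
      rw [if_pos hvy, if_pos hyN]
      simp only [Option.getD_some]
      rw [hrowy, List.getElem?_set]
      by_cases hux : x.toNat = c.1.toNat
      · have hux' : c.1 = x := by omega
        rw [if_pos hux, if_pos (by omega)]
        have hcxy : c = (x, y) := Prod.ext hux' hvy'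
        simp [hcxy]
      · have hune : c.1 ≠ x := fun he => hux (by rw [he])
        rw [if_neg hux]
        have hbase := hpt c ⟨hu, hu', hv, hv'⟩
        rw [pvGetV_char _ _ _ hu hv] at hbase
        have hv2 : vm[c.2.toNat]? = some vm[y.toNat] := by
          rw [← hvy, List.getElem?_eq_getElem hyN]
        rw [hv2] at hbase
        simp only [Option.getD_some] at hbase
        rw [hbase]
        have hne : c ≠ (x, y) := fun he => hune (by rw [he])
        simp [hne]
    · rw [if_neg hvy]
      have hbase := hpt c ⟨hu, hu', hv, hv'⟩
      rw [pvGetV_char _ _ _ hu hv] at hbase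
      rw [hbase]
      have hne : c ≠ (x, y) := by
        intro he
        apply hvy
        rw [he]
      simp [hne]

lemma pvShape_setM (m : List (List Int)) (n : Int) (x y v : Int) (hs : pvShape m n)
    (hin : pvInG n (x, y)) : pvShape (pvSetM m x y v) n := by
  obtain ⟨hlen, hrows⟩ := hs
  obtain ⟨hx, hx', hy, hy'⟩ := hin
  have hyN : y.toNat < m.length := by omega
  refine ⟨by simp [pvSetM, hlen], ?_⟩
  intro row hrow
  rcases List.mem_or_eq_of_mem_set hrow with h | h
  · exact hrows row h
  · rw [h, List.getD_eq_getElem?_getD, List.getElem?_eq_getElem hyN]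
    simp only [Option.getD_some, List.length_set]
    exact hrows _ (List.getElem_mem hyN)

lemma pvGetM_char (m : List (List Int)) (z : Int × Int) :
    pvGetM m z = ((m[z.2.toNat]?.getD [])[z.1.toNat]?).getD 0 := by
  unfold pvGetM
  rw [List.getD_eq_getElem?_getD, List.getD_eq_getElem?_getD]

lemma pvGetM_setM (m : List (List Int)) (n : Int) (x y v : Int) (z : Int × Int)
    (hs : pvShape m n) (hin : pvInG n (x, y)) (hz : pvInG n z) :
    pvGetM (pvSetM m x y v) z = if z = (x, y) then v else pvGetM m z := by
  obtain ⟨hlen, hrows⟩ := hs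
  obtain ⟨hx, hx', hy, hy'⟩ := hin
  obtain ⟨hu, hu', hv, hv'⟩ := hz
  have hyN : y.toNat < m.length := by omega
  have hrowy : m.getD y.toNat [] = m[y.toNat] := by
    rw [List.getD_eq_getElem?_getD, List.getElem?_eq_getElem hyN]
    rfl
  have hrowlen : m[y.toNat].length = n.toNat := hrows _ (List.getElem_mem hyN)
  simp only [pvGetM_char]
  unfold pvSetM
  rw [List.getElem?_set]
  by_cases hvy : y.toNat = z.2.toNat
  · rw [if_pos hvy, if_pos hyN]
    simp only [Option.getD_some]
    rw [hrowy, List.getElem?_set]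
    by_cases hux : x.toNat = z.1.toNat
    · rw [if_pos hux, if_pos (by omega)]
      have hcxy : z = (x, y) := Prod.ext (by omega) (by omega)
      simp [hcxy]
    · rw [if_neg hux]
      have hne : z ≠ (x, y) := fun he => hux (by rw [he])
      rw [if_neg hne, ← hvy, List.getElem?_eq_getElem hyN]
      rfl
  · rw [if_neg hvy]
    have hne : z ≠ (x, y) := by
      intro he
      apply hvy
      rw [he]
    rw [if_neg hne]

lemma pvWrites_spec (n val : Int) (L : List (Int × Int)) (hL : ∀ c ∈ L, pvInG n c) :
    ∀ m : List (List Int), pvShape m n →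
      pvShape (L.foldl (fun m c => pvSetM m c.1 c.2 val) m) n ∧
      ∀ z, pvInG n z → pvGetM (L.foldl (fun m c => pvSetM m c.1 c.2 val) m) z
        = if z ∈ L then val else pvGetM m z := by
  induction L with
  | nil => intro m hs; exact ⟨hs, fun z _ => by simp⟩
  | cons c t ih =>
    intro m hs
    have hcin : pvInG n c := hL c List.mem_cons_self
    have hs1 : pvShape (pvSetM m c.1 c.2 val) n := pvShape_setM m n c.1 c.2 val hs hcin
    obtain ⟨hsf, hget⟩ := ih (fun z hz => hL z (List.mem_cons_of_mem c hz)) _ hs1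
    refine ⟨hsf, fun z hz => ?_⟩
    rw [List.foldl_cons, hget z hz,
      pvGetM_setM m n c.1 c.2 val z hs (by exact hcin) hz]
    by_cases h1 : z ∈ t
    · simp [h1]
    · by_cases h2 : z = c
      · simp [h2]
      · simp [h1, h2]

-- ==== A side: the BFS collects exactly one component ====

-- A's direction step with the direction resolved (pvDx/pvDy looked up)
def pvStepA' (a : List (List Int)) (n l r x y dxv dyv : Int) (st : PvSt) : PvSt :=
  if 0 ≤ x + dxv ∧ x + dxv < n ∧ 0 ≤ y + dyv ∧ y + dyv < n ∧
     pvGetV st.visited (x + dxv) (y + dyv) = false then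
    if l ≤ |pvCell a (x + dxv) (y + dyv) - pvCell a x y| ∧
       |pvCell a (x + dxv) (y + dyv) - pvCell a x y| ≤ r then
      ⟨pvSetV st.visited (x + dxv) (y + dyv), st.q ++ [(x + dxv, y + dyv)],
       st.sum + pvCell a (x + dxv) (y + dyv), st.num + 1, st.stop + 1,
       st.index ++ [(x + dxv, y + dyv)]⟩
    else st
  else st

lemma pvStepA_eq (a : List (List Int)) (n l r x y : Int) (st : PvSt) (i dxv dyv : Int)
    (h1 : (PySem.List.pyGet? pvDx i).getD 0 = dxv)
    (h2 : (PySem.List.pyGet? pvDy i).getD 0 = dyv) :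
    pvStepA a n l r x y st i = pvStepA' a n l r x y dxv dyv st := by
  unfold pvStepA pvStepA'
  rw [h1, h2]

lemma pvInner_unfold (a : List (List Int)) (n l r x y : Int) (st : PvSt) :
    pvInner a n l r x y st =
      pvStepA' a n l r x y 0 (-1) (pvStepA' a n l r x y (-1) 0
        (pvStepA' a n l r x y 0 1 (pvStepA' a n l r x y 1 0 st))) := by
  unfold pvInner
  rw [show PySem.List.pyRange 0 4 1 = [0, 1, 2, 3] by decide]
  simp only [List.foldl_cons, List.foldl_nil]
  rw [pvStepA_eq a n l r x y st 0 1 0 (by decide) (by decide),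
      pvStepA_eq a n l r x y _ 1 0 1 (by decide) (by decide),
      pvStepA_eq a n l r x y _ 2 (-1) 0 (by decide) (by decide),
      pvStepA_eq a n l r x y _ 3 0 (-1) (by decide) (by decide)]

-- the running BFS state, related to seed s and previously visited region W
def pvCore (a : List (List Int)) (n l r : Int) (W : Int × Int → Prop) (s : Int × Int)
    (st : PvSt) : Prop :=
  st.index.Nodup ∧ s ∈ st.index ∧
  (∀ z ∈ st.index, pvInG n z ∧ pvConn a n l r s z ∧ ¬ W z) ∧
  pvMatchP n st.visited (fun z => W z ∨ z ∈ st.index) ∧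
  st.sum = (st.index.map (fun z => pvCell a z.1 z.2)).sum ∧
  st.num = (st.index.length : Int) ∧
  st.stop = (st.index.length : Int) - 1

lemma pvStepA'_spec (a : List (List Int)) (n l r x y dxv dyv : Int) (st : PvSt)
    (W : Int × Int → Prop) (s : Int × Int)
    (hW : ∀ z w, W z → pvE a n l r z w → W w)
    (hd : (dxv = 1 ∧ dyv = 0) ∨ (dxv = 0 ∧ dyv = 1) ∨ (dxv = -1 ∧ dyv = 0) ∨
      (dxv = 0 ∧ dyv = -1))
    (hxy : (x, y) ∈ st.index) (hcore : pvCore a n l r W s st) :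
    pvCore a n l r W s (pvStepA' a n l r x y dxv dyv st) ∧
    (∃ Δ, (pvStepA' a n l r x y dxv dyv st).index = st.index ++ Δ ∧
      (pvStepA' a n l r x y dxv dyv st).q = st.q ++ Δ) ∧
    (pvE a n l r (x, y) (x + dxv, y + dyv) →
      (x + dxv, y + dyv) ∈ (pvStepA' a n l r x y dxv dyv st).index) := by
  obtain ⟨hnd, hs, hmem, hmatch, hsum, hnum, hstop⟩ := hcore
  unfold pvStepA'
  by_cases hb : 0 ≤ x + dxv ∧ x + dxv < n ∧ 0 ≤ y + dyv ∧ y + dyv < n ∧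
      pvGetV st.visited (x + dxv) (y + dyv) = false
  · rw [if_pos hb]
    by_cases hcond : l ≤ |pvCell a (x + dxv) (y + dyv) - pvCell a x y| ∧
        |pvCell a (x + dxv) (y + dyv) - pvCell a x y| ≤ r
    · rw [if_pos hcond]
      have hzin : pvInG n (x + dxv, y + dyv) := ⟨hb.1, hb.2.1, hb.2.2.1, hb.2.2.2.1⟩
      have hxyin := hmem (x, y) hxy
      have hadj : ((x + dxv, y + dyv).1 - (x, y).1 = 1 ∧ (x + dxv, y + dyv).2 = (x, y).2) ∨
          ((x + dxv, y + dyv).1 = (x, y).1 ∧ (x + dxv, y + dyv).2 - (x, y).2 = 1) ∨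
          ((x + dxv, y + dyv).1 - (x, y).1 = -1 ∧ (x + dxv, y + dyv).2 = (x, y).2) ∨
          ((x + dxv, y + dyv).1 = (x, y).1 ∧ (x + dxv, y + dyv).2 - (x, y).2 = -1) := by
        rcases hd with ⟨e1, e2⟩ | ⟨e1, e2⟩ | ⟨e1, e2⟩ | ⟨e1, e2⟩
        · exact Or.inl ⟨by omega, by omega⟩
        · exact Or.inr (Or.inl ⟨by omega, by omega⟩)
        · exact Or.inr (Or.inr (Or.inl ⟨by omega, by omega⟩))
        · exact Or.inr (Or.inr (Or.inr ⟨by omega, by omega⟩))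
      have hE : pvE a n l r (x, y) (x + dxv, y + dyv) :=
        ⟨hxyin.1, hzin, hadj, hcond.1, hcond.2⟩
      have hnotWmem : ¬ (W (x + dxv, y + dyv) ∨ (x + dxv, y + dyv) ∈ st.index) :=
        (hmatch.2 (x + dxv, y + dyv) hzin).mp hb.2.2.2.2
      have hznotin : (x + dxv, y + dyv) ∉ st.index := fun h => hnotWmem (Or.inr h)
      refine ⟨⟨?_, List.mem_append_left _ hs, ?_, ?_, ?_, ?_, ?_⟩,
        ⟨[(x + dxv, y + dyv)], rfl, rfl⟩, fun _ => by simp⟩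
      · rw [List.nodup_append]
        refine ⟨hnd, List.nodup_singleton _, ?_⟩
        intro v hv w hw
        rw [List.mem_singleton] at hw
        subst hw
        exact fun he => hznotin (he ▸ hv)
      · intro w hw
        rcases List.mem_append.mp hw with h | h
        · exact hmem w h
        · rw [List.mem_singleton] at h
          subst h
          exact ⟨hzin, Relation.ReflTransGen.tail hxyin.2.1 hE, fun hWz => hnotWmem (Or.inl hWz)⟩
      · have hset := pvMatchP_set n st.visited (fun z => W z ∨ z ∈ st.index)
          (x + dxv) (y + dyv) hmatch hzin
        refine pvMatchP_congr n _ _ _ hset ?_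
        intro c _
        simp only [List.mem_append, List.mem_singleton]
        tauto
      · simp only [List.map_append, List.sum_append, List.map_cons, List.map_nil,
          List.sum_cons, List.sum_nil]
        omega
      · simp only [List.length_append, List.length_singleton]
        push_cast
        omega
      · simp only [List.length_append, List.length_singleton]
        push_cast
        omega
    · rw [if_neg hcond]
      exact ⟨⟨hnd, hs, hmem, hmatch, hsum, hnum, hstop⟩, ⟨[], by simp, by simp⟩,
        fun hE => absurd ⟨hE.2.2.2.1, hE.2.2.2.2⟩ hcond⟩
  · rw [if_neg hb]
    refine ⟨⟨hnd, hs, hmem, hmatch, hsum, hnum, hstop⟩, ⟨[], by simp, by simp⟩, ?_⟩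
    intro hE
    have hzin : pvInG n (x + dxv, y + dyv) := hE.2.1
    by_cases hor : W (x + dxv, y + dyv) ∨ (x + dxv, y + dyv) ∈ st.index
    · rcases hor with hWz | hmemz
      · exact absurd (hW _ _ hWz (pvE_symm a n l r hE)) (hmem (x, y) hxy).2.2
      · exact hmemz
    · have hfalse := (hmatch.2 (x + dxv, y + dyv) hzin).mpr hor
      exact absurd ⟨hzin.1, hzin.2.1, hzin.2.2.1, hzin.2.2.2, hfalse⟩ hb

lemma pvInner_spec (a : List (List Int)) (n l r x y : Int) (st : PvSt)
    (W : Int × Int → Prop) (s : Int × Int)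
    (hW : ∀ z w, W z → pvE a n l r z w → W w)
    (hxy : (x, y) ∈ st.index) (hcore : pvCore a n l r W s st) :
    pvCore a n l r W s (pvInner a n l r x y st) ∧
    (∃ Δ, (pvInner a n l r x y st).index = st.index ++ Δ ∧
      (pvInner a n l r x y st).q = st.q ++ Δ) ∧
    (∀ w, pvE a n l r (x, y) w → w ∈ (pvInner a n l r x y st).index) := by
  have h1 := pvStepA'_spec a n l r x y 1 0 st W s hW (by left; exact ⟨rfl, rfl⟩) hxy hcore
  obtain ⟨Δ1, hΔ1, hq1⟩ := h1.2.1
  have hxy1 : (x, y) ∈ (pvStepA' a n l r x y 1 0 st).index := by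
    rw [hΔ1]; exact List.mem_append_left _ hxy
  have h2 := pvStepA'_spec a n l r x y 0 1 _ W s hW (by right; left; exact ⟨rfl, rfl⟩) hxy1 h1.1
  obtain ⟨Δ2, hΔ2, hq2⟩ := h2.2.1
  have hxy2 : (x, y) ∈ (pvStepA' a n l r x y 0 1 (pvStepA' a n l r x y 1 0 st)).index := by
    rw [hΔ2]; exact List.mem_append_left _ hxy1
  have h3 := pvStepA'_spec a n l r x y (-1) 0 _ W s hW
    (by right; right; left; exact ⟨rfl, rfl⟩) hxy2 h2.1
  obtain ⟨Δ3, hΔ3, hq3⟩ := h3.2.1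
  have hxy3 : (x, y) ∈ (pvStepA' a n l r x y (-1) 0
      (pvStepA' a n l r x y 0 1 (pvStepA' a n l r x y 1 0 st))).index := by
    rw [hΔ3]; exact List.mem_append_left _ hxy2
  have h4 := pvStepA'_spec a n l r x y 0 (-1) _ W s hW
    (by right; right; right; exact ⟨rfl, rfl⟩) hxy3 h3.1
  obtain ⟨Δ4, hΔ4, hq4⟩ := h4.2.1
  rw [pvInner_unfold]
  refine ⟨h4.1, ?_, ?_⟩
  · exact ⟨Δ1 ++ Δ2 ++ Δ3 ++ Δ4, by rw [hΔ4, hΔ3, hΔ2, hΔ1]; simp,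
      by rw [hq4, hq3, hq2, hq1]; simp⟩
  · intro w hE
    have hlift34 : ∀ v, v ∈ (pvStepA' a n l r x y (-1) 0
        (pvStepA' a n l r x y 0 1 (pvStepA' a n l r x y 1 0 st))).index →
        v ∈ (pvStepA' a n l r x y 0 (-1) (pvStepA' a n l r x y (-1) 0
          (pvStepA' a n l r x y 0 1 (pvStepA' a n l r x y 1 0 st)))).index := by
      intro v hv; rw [hΔ4]; exact List.mem_append_left _ hv
    have hlift23 : ∀ v, v ∈ (pvStepA' a n l r x y 0 1 (pvStepA' a n l r x y 1 0 st)).index →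
        v ∈ (pvStepA' a n l r x y (-1) 0
          (pvStepA' a n l r x y 0 1 (pvStepA' a n l r x y 1 0 st))).index := by
      intro v hv; rw [hΔ3]; exact List.mem_append_left _ hv
    have hlift12 : ∀ v, v ∈ (pvStepA' a n l r x y 1 0 st).index →
        v ∈ (pvStepA' a n l r x y 0 1 (pvStepA' a n l r x y 1 0 st)).index := by
      intro v hv; rw [hΔ2]; exact List.mem_append_left _ hv
    rcases hE.2.2.1 with ⟨e1, e2⟩ | ⟨e1, e2⟩ | ⟨e1, e2⟩ | ⟨e1, e2⟩
    · have hw : w = (x + 1, y + 0) := Prod.ext (by omega) (by omega)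
      subst hw
      exact hlift34 _ (hlift23 _ (hlift12 _ (h1.2.2 hE)))
    · have hw : w = (x + 0, y + 1) := Prod.ext (by omega) (by omega)
      subst hw
      exact hlift34 _ (hlift23 _ (h2.2.2 hE))
    · have hw : w = (x + -1, y + 0) := Prod.ext (by omega) (by omega)
      subst hw
      exact hlift34 _ (h3.2.2 hE)
    · have hw : w = (x + 0, y + -1) := Prod.ext (by omega) (by omega)
      subst hw
      exact h4.2.2 hE

lemma pvLoop_nil (a : List (List Int)) (n l r : Int) (st : PvSt) (h : st.q = []) :
    pvLoop a n l r st = st := by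
  rw [pvLoop, h]

lemma pvLoop_cons (a : List (List Int)) (n l r x y : Int) (st : PvSt)
    (rest : List (Int × Int)) (h : st.q = (x, y) :: rest) :
    pvLoop a n l r st =
      pvLoop a n l r (pvInner a n l r x y ⟨st.visited, rest, st.sum, st.num, st.stop, st.index⟩) := by
  rw [pvLoop, h]

lemma pvLoop_spec (a : List (List Int)) (n l r : Int) (W : Int × Int → Prop) (s : Int × Int)
    (hW : ∀ z w, W z → pvE a n l r z w → W w) :
    ∀ st done, st.index = done ++ st.q → pvCore a n l r W s st →
      (∀ z ∈ done, ∀ w, pvE a n l r z w → w ∈ st.index) →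
      pvCore a n l r W s (pvLoop a n l r st) ∧
      (∀ z ∈ (pvLoop a n l r st).index, ∀ w, pvE a n l r z w →
        w ∈ (pvLoop a n l r st).index) := by
  intro st
  induction st using pvLoop.induct a n l r with
  | case1 st hq =>
    intro done hidx hcore hclosed
    rw [pvLoop_nil a n l r st hq]
    refine ⟨hcore, ?_⟩
    rw [hq, List.append_nil] at hidx
    rw [hidx] at hclosed ⊢
    exact hclosed
  | case2 st x y rest hq ih =>
    intro done hidx hcore hclosed
    have hxy : (x, y) ∈ st.index := by
      rw [hidx, hq]
      exact List.mem_append_right _ List.mem_cons_self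
    have hcore1 : pvCore a n l r W s ⟨st.visited, rest, st.sum, st.num, st.stop, st.index⟩ :=
      hcore
    obtain ⟨hcore2, ⟨Δ, hΔi, hΔq⟩, hcl⟩ := pvInner_spec a n l r x y
      ⟨st.visited, rest, st.sum, st.num, st.stop, st.index⟩ W s hW hxy hcore1
    rw [pvLoop_cons a n l r x y st rest hq]
    refine ih (done ++ [(x, y)]) ?_ hcore2 ?_
    · rw [hΔi, hΔq, hidx, hq]
      simp
    · intro z hz w hEw
      rcases List.mem_append.mp hz with h | h
      · rw [hΔi]
        exact List.mem_append_left _ (hclosed z h w hEw)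
      · rw [List.mem_singleton] at h
        subst h
        exact hcl w hEw

lemma pvBfs_spec (a : List (List Int)) (n l r sx sy : Int) (W : Int × Int → Prop)
    (visited : List (List Bool)) (mapp : List (List Int))
    (hW : ∀ z w, W z → pvE a n l r z w → W w)
    (hin : pvInG n (sx, sy)) (hns : ¬ W (sx, sy))
    (hmatch : pvMatchP n visited W) (hshape : pvShape mapp n) :
    pvMatchP n (pvBfs a visited mapp n l r sx sy).1
      (fun z => W z ∨ pvConn a n l r (sx, sy) z) ∧
    pvShape (pvBfs a visited mapp n l r sx sy).2.1 n ∧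
    (∀ z, pvInG n z →
      (pvConn a n l r (sx, sy) z →
        pvGetM (pvBfs a visited mapp n l r sx sy).2.1 z = pvVal a n l r (sx, sy)) ∧
      (¬ pvConn a n l r (sx, sy) z →
        pvGetM (pvBfs a visited mapp n l r sx sy).2.1 z = pvGetM mapp z)) ∧
    (pvBfs a visited mapp n l r sx sy).2.2.2
      = ((pvComp a n l r (sx, sy)).length : Int) - 1 := by
  have hmatch0 : pvMatchP n (pvSetV visited sx sy)
      (fun z => W z ∨ z ∈ ([(sx, sy)] : List (Int × Int))) := by
    refine pvMatchP_congr n _ _ _ (pvMatchP_set n visited W sx sy hmatch hin) ?_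
    intro c _
    simp
  have hcore0 : pvCore a n l r W (sx, sy)
      ⟨pvSetV visited sx sy, [(sx, sy)], pvCell a sx sy, 1, 0, [(sx, sy)]⟩ := by
    refine ⟨List.nodup_singleton _, List.mem_singleton.mpr rfl, ?_, hmatch0, by simp, by simp, by simp⟩
    intro z hz
    rw [List.mem_singleton] at hz
    subst hz
    exact ⟨hin, Relation.ReflTransGen.refl, hns⟩
  have hloop := pvLoop_spec a n l r W (sx, sy) hW
    ⟨pvSetV visited sx sy, [(sx, sy)], pvCell a sx sy, 1, 0, [(sx, sy)]⟩ [] rfl hcore0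
    (by simp)
  unfold pvBfs
  obtain ⟨⟨hnd, hsmem, hmem, hmatchF, hsumF, hnumF, hstopF⟩, hclosF⟩ := hloop
  set F := pvLoop a n l r
    ⟨pvSetV visited sx sy, [(sx, sy)], pvCell a sx sy, 1, 0, [(sx, sy)]⟩ with hF
  dsimp only
  have hstepin : ∀ z, pvConn a n l r (sx, sy) z → z ∈ F.index := by
    intro z h
    induction h with
    | refl => exact hsmem
    | tail _ he ih => exact hclosF _ ih _ he
  have hiff : ∀ z, z ∈ F.index ↔ z ∈ pvComp a n l r (sx, sy) := by
    intro z
    constructor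
    · intro hz
      exact (pvMem_comp a n l r (sx, sy) z).mpr ⟨(hmem z hz).1, (hmem z hz).2.1⟩
    · intro hz
      exact hstepin z ((pvMem_comp a n l r (sx, sy) z).mp hz).2
  have hperm : F.index.Perm (pvComp a n l r (sx, sy)) :=
    (List.perm_ext_iff_of_nodup hnd (pvNodup_comp a n l r (sx, sy))).mpr hiff
  have hlen : F.index.length = (pvComp a n l r (sx, sy)).length := hperm.length_eq
  have hsum2 : (F.index.map (fun z => pvCell a z.1 z.2)).sum
      = ((pvComp a n l r (sx, sy)).map (fun z => pvCell a z.1 z.2)).sum :=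
    (hperm.map (fun z => pvCell a z.1 z.2)).sum_eq
  have hval : PySem.Int.floordiv F.sum F.num = pvVal a n l r (sx, sy) := by
    rw [hsumF, hnumF, hsum2, hlen]
    rfl
  have hLin : ∀ c ∈ F.index, pvInG n c := fun c hc => (hmem c hc).1
  obtain ⟨hshapeW, hgetW⟩ :=
    pvWrites_spec n (PySem.Int.floordiv F.sum F.num) F.index hLin mapp hshape
  refine ⟨?_, hshapeW, ?_, ?_⟩
  · refine pvMatchP_congr n _ _ _ hmatchF ?_
    intro c hc
    rw [hiff c, pvMem_comp]
    constructor
    · rintro (h | h)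
      · exact Or.inl h
      · exact Or.inr h.2
    · rintro (h | h)
      · exact Or.inl h
      · exact Or.inr ⟨hc, h⟩
  · intro z hz
    constructor
    · intro hconn
      rw [hgetW z hz, if_pos ((hiff z).mpr ((pvMem_comp a n l r (sx, sy) z).mpr ⟨hz, hconn⟩)),
        hval]
    · intro hnconn
      rw [hgetW z hz,
        if_neg (fun hmemz => hnconn ((pvMem_comp a n l r (sx, sy) z).mp ((hiff z).mp hmemz)).2)]
  · rw [hstopF, hlen]

-- ==== A side: the outer double loop ====

def pvOuterStep (a : List (List Int)) (n l r : Int)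
    (s : List (List Bool) × List (List Int) × Int) (c : Int × Int) :
    List (List Bool) × List (List Int) × Int :=
  if pvGetV s.1 c.1 c.2 = false then
    ((pvBfs a s.1 s.2.1 n l r c.1 c.2).1, (pvBfs a s.1 s.2.1 n l r c.1 c.2).2.1,
     s.2.2 + (pvBfs a s.1 s.2.1 n l r c.1 c.2).2.2.2)
  else s

lemma search_eq_foldl (a : List (List Int)) (n l r : Int) :
    search a n l r =
      (((pvAllCells n).foldl (pvOuterStep a n l r)
          (List.replicate n.toNat (List.replicate n.toNat false),
           List.replicate n.toNat (List.replicate n.toNat (0 : Int)), (0 : Int))).2.1,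
       ((pvAllCells n).foldl (pvOuterStep a n l r)
          (List.replicate n.toNat (List.replicate n.toNat false),
           List.replicate n.toNat (List.replicate n.toNat (0 : Int)), (0 : Int))).2.2) := by
  unfold search pvAllCells pvOuterStep
  rw [List.foldl_flatMap]
  simp only [List.foldl_map]

-- region already absorbed after processing the seed prefix P
def pvOW (a : List (List Int)) (n l r : Int) (P : List (Int × Int)) (z : Int × Int) : Prop :=
  ∃ p ∈ P, pvConn a n l r p z

lemma pvOW_closed (a : List (List Int)) (n l r : Int) (P : List (Int × Int)) :
    ∀ z w, pvOW a n l r P z → pvE a n l r z w → pvOW a n l r P w := by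
  rintro z w ⟨p, hp, hconn⟩ hE
  exact ⟨p, hp, hconn.tail hE⟩

def pvOuterInv (a : List (List Int)) (n l r : Int) (P : List (Int × Int))
    (sA : List (List Bool) × List (List Int) × Int) : Prop :=
  pvMatchP n sA.1 (pvOW a n l r P) ∧ pvShape sA.2.1 n ∧
  (∀ z, pvInG n z → (pvOW a n l r P z → pvGetM sA.2.1 z = pvVal a n l r z) ∧
                    (¬ pvOW a n l r P z → pvGetM sA.2.1 z = 0)) ∧
  ∃ S : List (Int × Int), S.Nodup ∧ (∀ s0 ∈ S, s0 ∈ P ∧ pvInG n s0) ∧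
    (∀ p ∈ P, ∃ s0 ∈ S, pvConn a n l r s0 p) ∧
    (∀ s0 ∈ S, ∀ t0 ∈ S, s0 ≠ t0 → ¬ pvConn a n l r s0 t0) ∧
    sA.2.2 = (S.map (fun s0 => ((pvComp a n l r s0).length : Int) - 1)).sum

lemma pvGetM_zeroMat (n : Int) (z : Int × Int) (hz : pvInG n z) :
    pvGetM (List.replicate n.toNat (List.replicate n.toNat (0 : Int))) z = 0 := by
  obtain ⟨h1, h2, h3, h4⟩ := hz
  rw [pvGetM_char, List.getElem?_replicate, if_pos (by omega)]
  simp only [Option.getD_some]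
  rw [List.getElem?_replicate, if_pos (by omega)]
  rfl

lemma pvOuterInv_init (a : List (List Int)) (n l r : Int) :
    pvOuterInv a n l r []
      (List.replicate n.toNat (List.replicate n.toNat false),
       List.replicate n.toNat (List.replicate n.toNat (0 : Int)), (0 : Int)) := by
  refine ⟨?_, ⟨by simp, fun row hrow => by rw [List.eq_of_mem_replicate hrow]; simp⟩, ?_, [],
    List.nodup_nil, by simp, by simp, by simp, by simp⟩
  · refine pvMatchP_congr n _ _ _ (pvMatchP_init n) ?_
    intro c _
    simp [pvOW]
  · intro z hz
    refine ⟨?_, fun _ => pvGetM_zeroMat n z hz⟩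
    rintro ⟨p, hp, -⟩
    exact absurd hp (List.not_mem_nil)

lemma pvOuterStep_spec (a : List (List Int)) (n l r : Int) (P : List (Int × Int))
    (c : Int × Int) (hc : pvInG n c) (hcP : c ∉ P)
    (sA : List (List Bool) × List (List Int) × Int) (hinv : pvOuterInv a n l r P sA) :
    pvOuterInv a n l r (P ++ [c]) (pvOuterStep a n l r sA c) := by
  obtain ⟨hmatch, hshape, hget, S, hSnd, hSmem, hScov, hSdisj, hstop⟩ := hinv
  unfold pvOuterStep
  by_cases hv : pvGetV sA.1 c.1 c.2 = false
  · rw [if_pos hv]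
    have hnW : ¬ pvOW a n l r P c := (hmatch.2 c hc).mp hv
    have hbfs := pvBfs_spec a n l r c.1 c.2 (pvOW a n l r P) sA.1 sA.2.1
      (pvOW_closed a n l r P) hc hnW hmatch hshape
    simp only [Prod.mk.eta] at hbfs
    obtain ⟨hbm, hbs, hbg, hbstop⟩ := hbfs
    have hOW' : ∀ z, pvOW a n l r (P ++ [c]) z ↔ (pvOW a n l r P z ∨ pvConn a n l r c z) := by
      intro z
      constructor
      · rintro ⟨p, hp, hconn⟩
        rcases List.mem_append.mp hp with h | h
        · exact Or.inl ⟨p, h, hconn⟩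
        · rw [List.mem_singleton] at h
          subst h
          exact Or.inr hconn
      · rintro (⟨p, hp, hconn⟩ | h)
        · exact ⟨p, List.mem_append_left _ hp, hconn⟩
        · exact ⟨c, List.mem_append_right _ (List.mem_singleton.mpr rfl), h⟩
    have hcS : c ∉ S := fun h => hcP (hSmem c h).1
    refine ⟨pvMatchP_congr n _ _ _ hbm (fun z _ => (hOW' z).symm), hbs, ?_, S ++ [c], ?_, ?_, ?_,
      ?_, ?_⟩
    · intro z hz
      constructor
      · intro hw
        rcases (hOW' z).mp hw with h | h
        · by_cases hcz : pvConn a n l r c z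
          · rw [(hbg z hz).1 hcz]
            exact pvVal_eq_of_conn a n l r hcz
          · rw [(hbg z hz).2 hcz]
            exact (hget z hz).1 h
        · rw [(hbg z hz).1 h]
          exact pvVal_eq_of_conn a n l r h
      · intro hw
        rw [hOW'] at hw
        rw [(hbg z hz).2 (fun h => hw (Or.inr h))]
        exact (hget z hz).2 (fun h => hw (Or.inl h))
    · rw [List.nodup_append]
      exact ⟨hSnd, List.nodup_singleton _, fun v hv3 w hw3 => by
        rw [List.mem_singleton] at hw3
        subst hw3
        exact fun he => hcS (he ▸ hv3)⟩
    · intro s0 hs0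
      rcases List.mem_append.mp hs0 with h | h
      · exact ⟨List.mem_append_left _ (hSmem s0 h).1, (hSmem s0 h).2⟩
      · rw [List.mem_singleton] at h
        subst h
        exact ⟨List.mem_append_right _ (List.mem_singleton.mpr rfl), hc⟩
    · intro p hp
      rcases List.mem_append.mp hp with h | h
      · obtain ⟨s0, hs0, hconn⟩ := hScov p h
        exact ⟨s0, List.mem_append_left _ hs0, hconn⟩
      · rw [List.mem_singleton] at h
        subst h
        exact ⟨p, List.mem_append_right _ (List.mem_singleton.mpr rfl),
          Relation.ReflTransGen.refl⟩
    · intro s0 hs0 t0 ht0 hne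
      rcases List.mem_append.mp hs0 with h | h <;> rcases List.mem_append.mp ht0 with h' | h'
      · exact hSdisj s0 h t0 h' hne
      · rw [List.mem_singleton] at h'
        subst h'
        exact fun hconn => hnW ⟨s0, (hSmem s0 h).1, hconn⟩
      · rw [List.mem_singleton] at h
        subst h
        exact fun hconn => hnW ⟨t0, (hSmem t0 h').1, pvConn_symm a n l r hconn⟩
      · rw [List.mem_singleton] at h h'
        exact absurd (h.trans h'.symm) hne
    · rw [List.map_append, List.sum_append, ← hstop, hbstop]
      simp
  · rw [if_neg hv]
    have hWc : pvOW a n l r P c := by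
      by_contra hn
      exact hv ((hmatch.2 c hc).mpr hn)
    have hOW' : ∀ z, pvOW a n l r (P ++ [c]) z ↔ pvOW a n l r P z := by
      intro z
      constructor
      · rintro ⟨p, hp, hconn⟩
        rcases List.mem_append.mp hp with h | h
        · exact ⟨p, h, hconn⟩
        · rw [List.mem_singleton] at h
          subst h
          obtain ⟨p0, hp0, hp0c⟩ := hWc
          exact ⟨p0, hp0, hp0c.trans hconn⟩
      · rintro ⟨p, hp, hconn⟩
        exact ⟨p, List.mem_append_left _ hp, hconn⟩
    refine ⟨pvMatchP_congr n _ _ _ hmatch (fun z _ => (hOW' z).symm), hshape, ?_, S, hSnd, ?_,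
      ?_, hSdisj, hstop⟩
    · intro z hz
      exact ⟨fun hw => (hget z hz).1 ((hOW' z).mp hw),
        fun hw => (hget z hz).2 (fun h => hw ((hOW' z).mpr h))⟩
    · intro s0 hs0
      exact ⟨List.mem_append_left _ (hSmem s0 hs0).1, (hSmem s0 hs0).2⟩
    · intro p hp
      rcases List.mem_append.mp hp with h | h
      · exact hScov p h
      · rw [List.mem_singleton] at h
        subst h
        obtain ⟨p0, hp0, hp0c⟩ := hWc
        obtain ⟨s0, hs0, hs0p0⟩ := hScov p0 hp0
        exact ⟨s0, hs0, hs0p0.trans hp0c⟩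

lemma pvOuter_fold (a : List (List Int)) (n l r : Int) :
    ∀ (L P : List (Int × Int)), (P ++ L).Nodup → (∀ c ∈ P ++ L, pvInG n c) →
    ∀ sA, pvOuterInv a n l r P sA →
      pvOuterInv a n l r (P ++ L) (L.foldl (pvOuterStep a n l r) sA) := by
  intro L
  induction L with
  | nil =>
    intro P hnd hmem sA hinv
    simpa using hinv
  | cons c t ih =>
    intro P hnd hmem sA hinv
    have hcP : c ∉ P := by
      intro h
      have hdisj := (List.nodup_append.mp hnd).2.2
      exact hdisj c h c List.mem_cons_self rfl
    have hc : pvInG n c := hmem c (List.mem_append_right _ List.mem_cons_self)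
    have hstep := pvOuterStep_spec a n l r P c hc hcP sA hinv
    have := ih (P ++ [c]) (by simpa using hnd) (by simpa using hmem) _ hstep
    simpa using this

-- ==== counting components, and the final assembly ====

lemma pvSum_ite_one (S : List (Int × Int)) (p : (Int × Int) → Bool) :
    (S.map (fun s => if p s then 1 else 0)).sum = S.countP p := by
  induction S with
  | nil => simp
  | cons x t ih =>
    rw [List.map_cons, List.sum_cons, ih, List.countP_cons]
    by_cases h : p x <;> simp [h] <;> omega

lemma pvSum_map_add (S : List (Int × Int)) (f g : (Int × Int) → Nat) :
    (S.map (fun s => f s + g s)).sum = (S.map f).sum + (S.map g).sum := by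
  induction S with
  | nil => simp
  | cons x t ih =>
    simp only [List.map_cons, List.sum_cons, ih]
    omega

lemma pvCountP_eq_one {α : Type} (S : List α) (p : α → Bool) (hnd : S.Nodup) (s : α)
    (hs : s ∈ S) (hps : p s = true) (huniq : ∀ t ∈ S, p t = true → t = s) :
    S.countP p = 1 := by
  induction S with
  | nil => simp at hs
  | cons x t ih =>
    rw [List.nodup_cons] at hnd
    rw [List.countP_cons]
    rcases List.mem_cons.mp hs with he | hm
    · subst he
      rw [if_pos hps]
      have hzero : t.countP p = 0 := by
        rw [List.countP_eq_zero]
        intro y hy hpy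
        exact hnd.1 ((huniq y (List.mem_cons_of_mem s hy) hpy) ▸ hy)
      omega
    · have hpx : p x = false := by
        by_contra hpx
        have := huniq x List.mem_cons_self (by simpa using hpx)
        subst this
        exact hnd.1 hm
      rw [if_neg (by simp [hpx])]
      exact ih hnd.2 hm (fun y hy hpy => huniq y (List.mem_cons_of_mem x hy) hpy)

lemma pvPartition_sum (S : List (Int × Int)) (q : (Int × Int) → (Int × Int) → Bool) :
    ∀ G : List (Int × Int), (∀ z ∈ G, S.countP (fun s => q s z) = 1) →
    (S.map (fun s => G.countP (fun z => q s z))).sum = G.length := by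
  intro G
  induction G with
  | nil => intro _; simp
  | cons z G ih =>
    intro hone
    have hsplit : (S.map (fun s => (z :: G).countP (fun z' => q s z'))).sum
        = (S.map (fun s => G.countP (fun z' => q s z') + (if q s z then 1 else 0))).sum := by
      congr 1
      apply List.map_congr_left
      intro s _
      rw [List.countP_cons]
    rw [hsplit, pvSum_map_add, ih (fun z' hz' => hone z' (List.mem_cons_of_mem z hz')),
      pvSum_ite_one, hone z List.mem_cons_self, List.length_cons]

lemma pvSum_natCast (L : List (Int × Int)) (f : (Int × Int) → Nat) :
    (L.map (fun x => ((f x : Int)))).sum = ((L.map f).sum : Int) := by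
  induction L with
  | nil => simp
  | cons x t ih => simp [ih]

lemma pvSum_sub_one (S : List (Int × Int)) (g : (Int × Int) → Int) :
    (S.map (fun s => g s - 1)).sum = (S.map g).sum - S.length := by
  induction S with
  | nil => simp
  | cons x t ih =>
    simp only [List.map_cons, List.sum_cons, ih, List.length_cons]
    push_cast
    ring

-- the seed list S of the outer loop: its components tile the grid
lemma pvS_sum (a : List (List Int)) (n l r : Int) (S : List (Int × Int)) (hSnd : S.Nodup)
    (hSmem : ∀ s0 ∈ S, s0 ∈ pvAllCells n ∧ pvInG n s0)
    (hScov : ∀ p ∈ pvAllCells n, ∃ s0 ∈ S, pvConn a n l r s0 p)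
    (hSdisj : ∀ s0 ∈ S, ∀ t0 ∈ S, s0 ≠ t0 → ¬ pvConn a n l r s0 t0) :
    (S.map (fun s0 => (((pvComp a n l r s0).length : Int)))).sum
      = ((pvAllCells n).length : Int) := by
  have hlen : ∀ s0 : Int × Int, (pvComp a n l r s0).length
      = (pvAllCells n).countP (fun d => @decide (pvConn a n l r s0 d)
          (Classical.propDecidable _)) := by
    intro s0
    exact List.countP_eq_length_filter.symm
  have hnat : (S.map (fun s0 => (pvComp a n l r s0).length)).sum = (pvAllCells n).length := by
    have hfun : (fun s0 => (pvComp a n l r s0).length)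
        = fun s0 => (pvAllCells n).countP (fun d => @decide (pvConn a n l r s0 d)
            (Classical.propDecidable _)) := funext hlen
    rw [hfun]
    apply pvPartition_sum
    intro z hz
    obtain ⟨s0, hs0, hconn⟩ := hScov z hz
    refine pvCountP_eq_one S _ hSnd s0 hs0 (by simp [hconn]) ?_
    intro t ht hdec
    simp only [decide_eq_true_eq] at hdec
    by_contra hne
    exact hSdisj t ht s0 hs0 hne (hdec.trans (pvConn_symm a n l r hconn))
  rw [pvSum_natCast, hnat]

lemma pvS_length (a : List (List Int)) (n l r : Int) (S : List (Int × Int)) (hSnd : S.Nodup)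
    (hSmem : ∀ s0 ∈ S, s0 ∈ pvAllCells n ∧ pvInG n s0)
    (hScov : ∀ p ∈ pvAllCells n, ∃ s0 ∈ S, pvConn a n l r s0 p)
    (hSdisj : ∀ s0 ∈ S, ∀ t0 ∈ S, s0 ≠ t0 → ¬ pvConn a n l r s0 t0) :
    S.length = pvNcomp a n l r := by
  have hinj : ∀ x ∈ S, ∀ y ∈ S, pvComp a n l r x = pvComp a n l r y → x = y := by
    intro x hx y hy he
    by_contra hne
    have hconn : pvConn a n l r x y :=
      (pvComp_eq_iff_conn a n l r x y (hSmem x hx).2 (hSmem y hy).2).mp he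
    exact hSdisj x hx y hy hne hconn
  have hndmap : (S.map (pvComp a n l r)).Nodup := List.Nodup.map_on hinj hSnd
  have hset : (S.map (pvComp a n l r)).toFinset = ((pvAllCells n).map (pvComp a n l r)).toFinset := by
    ext K
    simp only [List.mem_toFinset, List.mem_map]
    constructor
    · rintro ⟨s0, hs0, he⟩
      exact ⟨s0, (hSmem s0 hs0).1, he⟩
    · rintro ⟨z, hz, he⟩
      obtain ⟨s0, hs0, hconn⟩ := hScov z hz
      exact ⟨s0, hs0, by rw [pvComp_eq_of_conn a n l r hconn, he]⟩
  have h1 : S.length = (S.map (pvComp a n l r)).length := by simp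
  rw [h1, ← List.toFinset_card_of_nodup hndmap, hset]
  rfl

lemma pvGetM_getElem (m : List (List Int)) (i j : Nat)
    (hj' : j < m.length) (hi' : i < m[j].length) :
    pvGetM m ((i : Int), (j : Int)) = m[j][i] := by
  unfold pvGetM
  simp only [Int.toNat_natCast, List.getD_eq_getElem?_getD]
  rw [List.getElem?_eq_getElem hj']
  simp only [Option.getD_some]
  rw [List.getElem?_eq_getElem hi']
  rfl

lemma pvTrivial (a : List (List Int)) (n l r : Int) (hn : ¬ 0 < n) :
    search a n l r = ([], 0) ∧ search_alt a n l r = ([], 0) := by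
  have hr : PySem.List.pyRange 0 n 1 = [] := PySem.List.pyRange_one_eq_nil (by omega)
  have ht : n.toNat = 0 := by omega
  constructor
  · unfold search
    rw [hr]
    simp [ht]
  · unfold search_alt pvAgg
    rw [hr]
    simp
    rfl

-- ===== VERDICT (by name: the statement is the Claim_ definition above) =====
theorem search_spec : Claim_equal_search := by
  intro a n l r hDom hPre
  unfold Spec_search
  by_cases hn : 0 < n
  · have hgridmem : ∀ c ∈ pvAllCells n, pvInG n c := fun c hc => (pvMem_allCells' n c).mp hc
    have hfold := pvOuter_fold a n l r (pvAllCells n) [] (by simpa using pvNodup_allCells n)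
      (by simpa using hgridmem) _ (pvOuterInv_init a n l r)
    rw [List.nil_append] at hfold
    obtain ⟨hmatchF, hshapeF, hgetF, S, hSnd, hSmem', hScov, hSdisj, hstopF⟩ := hfold
    have hSmem : ∀ s0 ∈ S, s0 ∈ pvAllCells n ∧ pvInG n s0 := by
      intro s0 hs0
      exact ⟨(hSmem' s0 hs0).1, (hSmem' s0 hs0).2⟩
    rw [search_eq_foldl, search_alt_char]
    have hlen1 : (PySem.List.pyRange 0 n 1).length = n.toNat := by
      rw [PySem.List.length_pyRange_one]
      simp
    rw [Prod.ext_iff]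
    dsimp only
    constructor
    · -- matrices agree entry by entry
      apply List.ext_getElem
      · rw [List.length_map, hlen1, hshapeF.1]
      · intro j h1 h2
        rw [List.length_map, hlen1] at h2
        have hrow : ((pvAllCells n).foldl (pvOuterStep a n l r)
            (List.replicate n.toNat (List.replicate n.toNat false),
             List.replicate n.toNat (List.replicate n.toNat (0 : Int)),
             (0 : Int))).2.1[j].length = n.toNat :=
          hshapeF.2 _ (List.getElem_mem (by rw [hshapeF.1]; exact h2))
        apply List.ext_getElem
        · rw [hrow, List.getElem_map, List.length_map, hlen1]
        · intro i hi1 hi2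
          rw [hrow] at hi1
          have hzin : pvInG n ((i : Int), (j : Int)) := by
            refine ⟨by positivity, by omega, by positivity, by omega⟩
          have hOW : pvOW a n l r (pvAllCells n) ((i : Int), (j : Int)) :=
            ⟨_, (pvMem_allCells' n _).mpr hzin, Relation.ReflTransGen.refl⟩
          have hval := (hgetF _ hzin).1 hOW
          have hgm := pvGetM_getElem ((pvAllCells n).foldl (pvOuterStep a n l r)
              (List.replicate n.toNat (List.replicate n.toNat false),
               List.replicate n.toNat (List.replicate n.toNat (0 : Int)),
               (0 : Int))).2.1 i j (by rw [hshapeF.1]; exact h2) (by rw [hrow]; exact hi1)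
          simp only [List.getElem_map, PySem.List.getElem_pyRange_one]
          have hzero : pvVal a n l r (0 + (i : Int), 0 + (j : Int)) = pvVal a n l r ((i : Int), (j : Int)) := by
            norm_num
          rw [hzero, ← hval]
          exact hgm.symm
    · -- the absorbed count
      rw [hstopF, pvSum_sub_one,
        pvS_sum a n l r S hSnd hSmem hScov hSdisj,
        pvS_length a n l r S hSnd hSmem hScov hSdisj]
  · obtain ⟨h1, h2⟩ := pvTrivial a n l r hn
    rw [h1, h2]
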